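-- pv_equiv track=rewrite | github.com/pyo8470/Baekjoon | 프로그래머스/2/169199. 리코쳇 로봇/리코쳇 로봇.py | solution
-- ===== SOURCE A (Python) =====
-- from collections import deque
--
-- def solution(board):
--     directions= [(0,-1), (0,1), (1,0), (-1,0)]
--     n = len(board)
--     m = len(board[0])
--     answer = []
--
--     def bfs():
--         start = (0,0)
--         goal = (0,0)
--         for y in range(n):
--             for x in range(m):
--                 if board[y][x] == 'R':
--                     start = (x, y)
--                 if board[y][x] == 'G':
--                     goal = (x, y)
--
--         dq = deque()
--         dq.append((start[0], start[1], 0))  # (x, y, 이동횟수)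
--         visited = [[False for _ in range(m)] for _ in range(n)]
--         visited[start[1]][start[0]] = True
--
--         while dq:
--             x, y, count = dq.popleft()
--
--             if (x, y) == goal:
--                 answer.append(count)
--                 return
--
--             for dx, dy in directions:
--                 nx, ny = x, y
--                 while True:
--                     tx, ty = nx + dx, ny + dy
--                     if 0 <= tx < m and 0 <= ty < n and board[ty][tx] != 'D':
--                         nx, ny = tx, ty
--                     else:
--                         break
--
--                 if not visited[ny][nx]:
--                     visited[ny][nx] = True
--                     dq.append((nx, ny, count + 1))
--
--     bfs()
--     return min(answer) if answer else -1
-- ===== SOURCE B (Python) =====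
-- def solution(board):
--     n = len(board)
--     m = len(board[0])
--     start = (0, 0)
--     goal = (0, 0)
--     for y in range(n):
--         for x in range(m):
--             if board[y][x] == 'R':
--                 start = (x, y)
--             if board[y][x] == 'G':
--                 goal = (x, y)
--
--     INF = n * m
--     dist = {(x, y): INF for y in range(n) for x in range(m)}
--     dist[start] = 0
--     for _ in range(n * m):
--         changed = False
--         for y in range(n):
--             for x in range(m):
--                 d = dist[(x, y)]
--                 if d < INF:
--                     for dx, dy in ((0, -1), (0, 1), (1, 0), (-1, 0)):
--                         tx, ty = x, y
--                         while 0 <= tx + dx < m and 0 <= ty + dy < n and board[ty + dy][tx + dx] != 'D':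
--                             tx += dx
--                             ty += dy
--                         if d + 1 < dist[(tx, ty)]:
--                             dist[(tx, ty)] = d + 1
--                             changed = True
--         if not changed:
--             break
--     g = dist[goal]
--     return g if g < INF else -1
-- ===== Notes on version B (the rewrite author's own statement) =====
-- stated objective: alternative
-- what changed: Replaces the BFS queue entirely by Bellman-Ford-style dynamic programming: a distance table over all cells initialised to INF (0 at start) is repeatedly relaxed by full row-major sweeps (dist[slide(c)] = min(dist[slide(c)], dist[c]+1)) until a sweep changes nothing, then dist[goal] is read off; there is no queue, no frontier and no visited structure.
import Mathlib
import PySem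

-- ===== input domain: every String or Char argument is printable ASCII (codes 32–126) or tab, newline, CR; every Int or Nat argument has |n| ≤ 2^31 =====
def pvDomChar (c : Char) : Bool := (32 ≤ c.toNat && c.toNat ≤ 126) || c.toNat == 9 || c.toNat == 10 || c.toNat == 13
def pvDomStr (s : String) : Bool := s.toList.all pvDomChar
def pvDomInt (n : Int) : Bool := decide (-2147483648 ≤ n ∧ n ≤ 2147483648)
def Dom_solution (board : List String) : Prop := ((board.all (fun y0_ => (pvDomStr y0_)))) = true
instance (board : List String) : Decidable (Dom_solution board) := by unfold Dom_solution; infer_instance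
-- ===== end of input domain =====

-- B replaces A's BFS queue by Bellman-Ford-style relaxation: a distance table over all cells,
-- swept row-major until no entry changes; equal return value on every input where A returns (Pre_solution).

-- ===== PORT A =====
-- board[ty][tx]; an out-of-range access is an IndexError in Python (outside Pre_), defaulted to 'D' here
def chA (board : List String) (ty tx : Int) : Char :=
  ((PySem.List.pyGet? board ty).bind (fun r => PySem.Str.pyGet? r tx)).getD 'D'

-- the slide condition  0 <= tx < m and 0 <= ty < n and board[ty][tx] != 'D'
def condA (board : List String) (m n tx ty : Int) : Bool :=
  decide (0 ≤ tx) && decide (tx < m) && decide (0 ≤ ty) && decide (ty < n) && (chA board ty tx != 'D')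

-- the inner 'while True' slide; fuel ≥ n+m+1 is more than the moves a slide inside the n×m grid can make,
-- so the fuel-out branch is never reached on inputs admitted by Pre_
def slideA (board : List String) (m n : Int) (fuel : Nat) (dx dy nx ny : Int) : Int × Int :=
  match fuel with
  | 0 => (nx, ny)
  | f + 1 =>
    if condA board m n (nx + dx) (ny + dy) then slideA board m n f dx dy (nx + dx) (ny + dy)
    else (nx, ny)

-- visited[ny][nx] (read: default True, write: no-op, when out of range — Python raises there, outside Pre_)
def visGet (v : List (List Bool)) (ny nx : Int) : Bool :=
  PySem.List.pyGetD (PySem.List.pyGetD v ny []) nx true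

def visSet (v : List (List Bool)) (ny nx : Int) : List (List Bool) :=
  PySem.List.pySetD v ny (PySem.List.pySetD (PySem.List.pyGetD v ny []) nx true)

-- termination measure helper for the while-loop: number of False entries of visited
def countFalse (v : List (List Bool)) : Nat := (v.map (fun r => r.count false)).sum

def dirsA : List (Int × Int) := [(0, -1), (0, 1), (1, 0), (-1, 0)]

-- body of 'for dx, dy in directions'
def stepA (board : List String) (m n : Int) (slf : Nat) (x y c : Int)
    (st : List (List Bool) × List (Int × Int × Int)) (d : Int × Int) :
    List (List Bool) × List (Int × Int × Int) :=
  let p := slideA board m n slf d.1 d.2 x y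
  if visGet st.1 p.2 p.1 then st
  else (visSet st.1 p.2 p.1, st.2 ++ [(p.1, p.2, c + 1)])

def pushA (board : List String) (m n : Int) (slf : Nat) (x y c : Int)
    (st : List (List Bool) × List (Int × Int × Int)) : List (List Bool) × List (Int × Int × Int) :=
  dirsA.foldl (stepA board m n slf x y c) st

-- (termination lemmas for loopA; the port cites them in decreasing_by)
theorem count_set_true_aux (r : List Bool) (j : Nat) (h : r[j]? = some false) :
    (r.set j true).count false + 1 = r.count false := by
  induction r generalizing j with
  | nil => simp at h
  | cons b r ih =>
    cases j with
    | zero =>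
      simp at h
      subst h
      simp
    | succ j =>
      simp only [List.getElem?_cons_succ] at h
      simp only [List.set_cons_succ, List.count_cons]
      have := ih j h
      omega

theorem countFalse_set_aux (v : List (List Bool)) (k : Nat) (r r' : List Bool)
    (h : v[k]? = some r) :
    countFalse (v.set k r') + r.count false = countFalse v + r'.count false := by
  induction v generalizing k with
  | nil => simp at h
  | cons a v ih =>
    cases k with
    | zero =>
      simp at h
      subst h
      simp [countFalse]
      omega
    | succ k =>
      simp only [List.getElem?_cons_succ] at h
      simp only [List.set_cons_succ]
      have := ih k h
      simp [countFalse] at this ⊢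
      omega

theorem countFalse_visSet (v : List (List Bool)) (y x : Int) (h : visGet v y x = false) :
    countFalse (visSet v y x) + 1 = countFalse v := by
  unfold visGet at h
  unfold visSet
  rcases hvy : PySem.List.pyGet? v y with _ | row
  · exfalso
    simp only [PySem.List.pyGetD, hvy, Option.getD_none] at h
    cases hk : PySem.List.pyIdx? ([] : List Bool).length x <;>
      simp [PySem.List.pyGet?] at h
  · simp only [PySem.List.pyGetD, hvy, Option.getD_some] at h ⊢
    rcases hrx : PySem.List.pyGet? row x with _ | b
    · simp [hrx] at h
    · rw [hrx] at h
      simp at h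
      subst h
      simp only [PySem.List.pyGet?] at hvy hrx
      rcases hky : PySem.List.pyIdx? v.length y with _ | k
      · simp [hky] at hvy
      · rcases hjx : PySem.List.pyIdx? row.length x with _ | j
        · simp [hjx] at hrx
        · rw [hky] at hvy
          rw [hjx] at hrx
          simp only [Option.bind_some] at hvy hrx
          have hset1 : PySem.List.pySetD row x true = row.set j true := by
            simp [PySem.List.pySetD, PySem.List.pySet?, hjx]
          have hset2 : PySem.List.pySetD v y (row.set j true) = v.set k (row.set j true) := by
            simp [PySem.List.pySetD, PySem.List.pySet?, hky]
          rw [hset1, hset2]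
          have h1 := count_set_true_aux row j hrx
          have h2 := countFalse_set_aux v k row (row.set j true) hvy
          omega

theorem stepA_measure (board : List String) (m n : Int) (slf : Nat) (x y c : Int)
    (st : List (List Bool) × List (Int × Int × Int)) (d : Int × Int) :
    2 * countFalse (stepA board m n slf x y c st d).1 + (stepA board m n slf x y c st d).2.length
      ≤ 2 * countFalse st.1 + st.2.length := by
  by_cases h : visGet st.1 (slideA board m n slf d.1 d.2 x y).2 (slideA board m n slf d.1 d.2 x y).1 = true
  · simp [stepA, h]
  · have h' : visGet st.1 (slideA board m n slf d.1 d.2 x y).2 (slideA board m n slf d.1 d.2 x y).1 = false :=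
      by simpa using h
    have hc := countFalse_visSet st.1 _ _ h'
    simp only [stepA, h', if_false, Bool.false_eq_true, List.length_append, List.length_cons,
      List.length_nil]
    omega

theorem pushA_measure (board : List String) (m n : Int) (slf : Nat) (x y c : Int)
    (v : List (List Bool)) (q : List (Int × Int × Int)) :
    2 * countFalse (pushA board m n slf x y c (v, q)).1 + (pushA board m n slf x y c (v, q)).2.length
      ≤ 2 * countFalse v + q.length := by
  have gen : ∀ (ds : List (Int × Int)) (st : List (List Bool) × List (Int × Int × Int)),
      2 * countFalse (ds.foldl (stepA board m n slf x y c) st).1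
        + (ds.foldl (stepA board m n slf x y c) st).2.length
        ≤ 2 * countFalse st.1 + st.2.length := by
    intro ds
    induction ds with
    | nil => intro st; simp
    | cons d ds ih =>
      intro st
      calc _ ≤ 2 * countFalse (stepA board m n slf x y c st d).1
                + (stepA board m n slf x y c st d).2.length := ih _
        _ ≤ _ := stepA_measure board m n slf x y c st d
  exact gen dirsA (v, q)

-- the 'while dq' loop
def loopA (board : List String) (m n : Int) (slf : Nat) (goal : Int × Int) :
    List (List Bool) → List (Int × Int × Int) → Option Int
  | _, [] => none
  | v, (x, y, c) :: rest =>
    if (x, y) = goal then some c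
    else
      let st := pushA board m n slf x y c (v, rest)
      loopA board m n slf goal st.1 st.2
termination_by v dq => 2 * countFalse v + dq.length
decreasing_by
  have h := pushA_measure board m n slf x y c v rest
  simp only [List.length_cons]
  omega

-- start/goal scan: for y in range(n): for x in range(m): last R / last G wins, defaults (0,0)
def startGoalA (board : List String) (n m : Int) : (Int × Int) × (Int × Int) :=
  (PySem.List.pyRange 0 n).foldl (fun acc y =>
    (PySem.List.pyRange 0 m).foldl (fun acc x =>
      let ch := chA board y x
      let acc := if ch = 'R' then ((x, y), acc.2) else acc
      if ch = 'G' then (acc.1, (x, y)) else acc) acc)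
    (((0 : Int), (0 : Int)), ((0 : Int), (0 : Int)))

def solution (board : List String) : Int :=
  let n := PySem.List.len board
  let m := PySem.Str.len (PySem.List.pyGetD board 0 "")
  let sg := startGoalA board n m
  let start := sg.1
  let v0 := List.replicate n.toNat (List.replicate m.toNat false)
  let v1 := visSet v0 start.2 start.1
  let answer : List Int :=
    match loopA board m n ((n + m).toNat + 1) sg.2 v1 [(start.1, start.2, 0)] with
    | some c => [c]
    | none => []
  if answer.isEmpty then -1 else ((PySem.List.min? answer (fun c => c)).getD (-1))

-- ===== PORT B =====
-- B's Python shares A's board-scan and slide lines verbatim, so its port reuses chA/condA/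
-- slideA/startGoalA/dirsA; everything below (distance table, relaxation sweeps) is B's own.
-- dist = {(x, y): INF for y in range(n) for x in range(m)}
def distInit (n m INF : Int) : PySem.Dict (Int × Int) Int :=
  (PySem.List.pyRange 0 n).foldl (fun d y =>
    (PySem.List.pyRange 0 m).foldl (fun d x => d.insert (x, y) INF) d) PySem.Dict.empty

-- 'if d + 1 < dist[(tx, ty)]: dist[(tx, ty)] = d + 1; changed = True'
-- (dict reads are defaulted to 0 where the key is missing — Python raises KeyError there, outside Pre_)
def relaxB (board : List String) (m n : Int) (slf : Nat) (d x y : Int)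
    (st : PySem.Dict (Int × Int) Int × Bool) (dir : Int × Int) :
    PySem.Dict (Int × Int) Int × Bool :=
  let t := slideA board m n slf dir.1 dir.2 x y
  if d + 1 < st.1.getD t 0 then (st.1.insert t (d + 1), true) else st

-- body of 'for x in range(m)': read d = dist[(x, y)], relax all four slides if d < INF
def cellB (board : List String) (m n INF : Int) (slf : Nat) (y : Int)
    (st : PySem.Dict (Int × Int) Int × Bool) (x : Int) :
    PySem.Dict (Int × Int) Int × Bool :=
  let d := st.1.getD (x, y) 0
  if d < INF then dirsA.foldl (relaxB board m n slf d x y) st else st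

-- one full sweep 'for y in range(n): for x in range(m): …' with its changed flag
def sweepB (board : List String) (m n INF : Int) (slf : Nat)
    (dm : PySem.Dict (Int × Int) Int) : PySem.Dict (Int × Int) Int × Bool :=
  (PySem.List.pyRange 0 n).foldl (fun st y =>
    (PySem.List.pyRange 0 m).foldl (cellB board m n INF slf y) st) (dm, false)

-- 'for _ in range(n*m): changed = False; <sweep>; if not changed: break'
def loopBellB (board : List String) (m n INF : Int) (slf : Nat) :
    Nat → PySem.Dict (Int × Int) Int → PySem.Dict (Int × Int) Int
  | 0, dm => dm
  | k + 1, dm =>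
    let st := sweepB board m n INF slf dm
    if st.2 then loopBellB board m n INF slf k st.1 else st.1

def solution_alt (board : List String) : Int :=
  let n := PySem.List.len board
  let m := PySem.Str.len (PySem.List.pyGetD board 0 "")
  let sg := startGoalA board n m
  let INF := n * m
  let dm0 := (distInit n m INF).insert sg.1 0
  let dmF := loopBellB board m n INF ((n + m).toNat + 1) (n * m).toNat dm0
  let g := dmF.getD sg.2 0
  if g < INF then g else -1

-- ===== PRECONDITION & SPEC =====
-- Pre_ excludes exactly the boards on which the Python A raises: the empty board and a zero-width first row
-- (len(board[0]) / visited[0][0] fail), and any row shorter than len(board[0]) (the R/G scan reads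
-- board[y][x] for every x < m, an IndexError on such a row).  A returns normally on everything else.
def Pre_solution (board : List String) : Prop :=
  board ≠ [] ∧ 0 < (board.headD "").toList.length ∧
    ∀ s ∈ board, (board.headD "").toList.length ≤ s.toList.length

instance (board : List String) : Decidable (Pre_solution board) := by
  unfold Pre_solution; infer_instance

def pvWitness_solution : List String := ["RG", ".."]

def Spec_solution (board : List String) (out : Int) : Prop := out = solution_alt board
instance (board : List String) (out : Int) : Decidable (Spec_solution board out) := by
  unfold Spec_solution; infer_instance

-- ===== CLAIM (what is proved, stated in full; the proofs are below) =====
def Claim_equal_solution : Prop :=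
  ∀ (board : List String), Dom_solution board → Pre_solution board →
    Spec_solution board (solution board)

-- ===== LEMMAS AND PROOFS =====

-- ---------- proof-side abbreviations ----------
def tagL (l : List (Int × Int)) (c : Int) : List (Int × Int × Int) := l.map (fun p => (p.1, p.2, c))

def A2I (o : Option Int) : Int :=
  match o with
  | some c => c
  | none => -1

def inG (m n : Int) (p : Int × Int) : Prop := 0 ≤ p.1 ∧ p.1 < m ∧ 0 ≤ p.2 ∧ p.2 < n

-- visited matrix (A) and a visited set agree on all in-grid cells
def RelVS (m n : Int) (v : List (List Bool)) (s : PySem.Set (Int × Int)) : Prop :=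
  ∀ p : Int × Int, inG m n p → visGet v p.2 p.1 = PySem.Set.contains s p

-- proof-side frontier (level-order) BFS, the common reference point of both ports
def stepF (board : List String) (m n : Int) (slf : Nat) (p : Int × Int)
    (st : PySem.Set (Int × Int) × List (Int × Int)) (d : Int × Int) :
    PySem.Set (Int × Int) × List (Int × Int) :=
  let t := slideA board m n slf d.1 d.2 p.1 p.2
  if PySem.Set.contains st.1 t then st
  else (PySem.Set.add st.1 t, st.2 ++ [t])

def expandF (board : List String) (m n : Int) (slf : Nat)
    (st : PySem.Set (Int × Int) × List (Int × Int)) (frontier : List (Int × Int)) :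
    PySem.Set (Int × Int) × List (Int × Int) :=
  frontier.foldl (fun st p => dirsA.foldl (stepF board m n slf p) st) st

def loopF (board : List String) (m n : Int) (slf : Nat) (goal : Int × Int) :
    Nat → PySem.Set (Int × Int) → List (Int × Int) → Int → Int
  | 0, _, _, _ => -1
  | lv + 1, vis, frontier, dist =>
    if frontier.isEmpty then -1
    else if frontier.contains goal then dist
    else
      let st := expandF board m n slf (vis, []) frontier
      loopF board m n slf goal lv st.1 st.2 (dist + 1)

-- reachability spec: cells reachable in ≤ k slides, and the first level containing the goal
def succsP (board : List String) (m n : Int) (slf : Nat) (p : Int × Int) : List (Int × Int) :=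
  dirsA.map (fun d => slideA board m n slf d.1 d.2 p.1 p.2)

def reachF (board : List String) (m n : Int) (slf : Nat) (start : Int × Int) :
    Nat → List (Int × Int)
  | 0 => [start]
  | k + 1 => reachF board m n slf start k
      ++ (reachF board m n slf start k).flatMap (succsP board m n slf)

def ansSpec (board : List String) (m n : Int) (slf : Nat) (start goal : Int × Int)
    (M : Nat) : Int :=
  match (List.range (M + 1)).find?
      (fun j => decide (goal ∈ reachF board m n slf start j)) with
  | some j => (j : Int)
  | none => -1

-- all grid cells, row-major (the sweep order of B and the carrier for pigeonhole counting)
def cellsL (nN mN : Nat) : List (Int × Int) :=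
  (List.range nN).flatMap (fun (y : Nat) =>
    (List.range mN).map (fun (x : Nat) => ((x : Int), (y : Int))))

-- B's distance-table entry at a cell
def fD (dm : PySem.Dict (Int × Int) Int) (c : Int × Int) : Int := dm.getD c 0


-- ---------- A-side: the counted queue simulates the frontier BFS ----------
theorem contains_add (s : PySem.Set (Int × Int)) (t q : Int × Int) :
    PySem.Set.contains (PySem.Set.add s t) q = (PySem.Set.contains s q || q == t) := by
  simp [PySem.Set.contains, PySem.Set.mem_add, beq_eq_decide]

theorem condA_inG (board : List String) (m n tx ty : Int) (h : condA board m n tx ty = true) :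
    inG m n (tx, ty) := by
  simp only [condA, Bool.and_eq_true, decide_eq_true_eq] at h
  exact ⟨h.1.1.1.1, h.1.1.1.2, h.1.1.2, h.1.2⟩

theorem slideA_inG (board : List String) (m n : Int) :
    ∀ (fuel : Nat) (dx dy x y : Int), inG m n (x, y) →
      inG m n (slideA board m n fuel dx dy x y) := by
  intro fuel
  induction fuel with
  | zero => intro dx dy x y h; exact h
  | succ f ih =>
    intro dx dy x y h
    simp only [slideA]
    by_cases hc : condA board m n (x + dx) (y + dy) = true
    · rw [if_pos hc]; exact ih dx dy (x + dx) (y + dy) (condA_inG board m n _ _ hc)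
    · rw [if_neg hc]; exact h

theorem pyIdx?_nonneg (len : Nat) (i : Int) (h : 0 ≤ i) :
    PySem.List.pyIdx? len i = if i < (len : Int) then some i.toNat else none := by
  simp [PySem.List.pyIdx?, h]

-- resolve a false read: the write really happens at the resolved indices
theorem visGet_false_resolve (v : List (List Bool)) (y x : Int) (h : visGet v y x = false) :
    ∃ (k j : Nat) (row : List Bool),
      PySem.List.pyIdx? v.length y = some k ∧ v[k]? = some row ∧
      PySem.List.pyIdx? row.length x = some j ∧ row[j]? = some false ∧
      visSet v y x = v.set k (row.set j true) := by
  unfold visGet at h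
  rcases hvy : PySem.List.pyGet? v y with _ | row
  · exfalso
    simp only [PySem.List.pyGetD, hvy, Option.getD_none] at h
    simp [PySem.List.pyGet?] at h
  · simp only [PySem.List.pyGetD, hvy, Option.getD_some] at h
    rcases hrx : PySem.List.pyGet? row x with _ | b
    · simp [hrx] at h
    · rw [hrx] at h
      simp at h
      subst h
      simp only [PySem.List.pyGet?] at hvy hrx
      rcases hky : PySem.List.pyIdx? v.length y with _ | k
      · simp [hky] at hvy
      · rcases hjx : PySem.List.pyIdx? row.length x with _ | j
        · simp [hjx] at hrx
        · rw [hky] at hvy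
          rw [hjx] at hrx
          simp only [Option.bind_some] at hvy hrx
          refine ⟨k, j, row, by first | exact hky | rfl, hvy, by exact hjx, hrx, ?_⟩
          unfold visSet
          have h1 : PySem.List.pyGetD v y [] = row := by
            simp [PySem.List.pyGetD, PySem.List.pyGet?, hky, hvy]
          rw [h1]
          simp [PySem.List.pySetD, PySem.List.pySet?, hky, hjx]

theorem visGet_visSet_self (v : List (List Bool)) (y x : Int) (h : visGet v y x = false) :
    visGet (visSet v y x) y x = true := by
  obtain ⟨k, j, row, hky, hvk, hjx, hrj, hset⟩ := visGet_false_resolve v y x h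
  have hkl : k < v.length := List.getElem?_eq_some_iff.mp hvk |>.1
  have hjl : j < row.length := List.getElem?_eq_some_iff.mp hrj |>.1
  rw [hset]
  unfold visGet
  have h1 : PySem.List.pyGetD (v.set k (row.set j true)) y [] = row.set j true := by
    simp [PySem.List.pyGetD, PySem.List.pyGet?, List.length_set, hky,
      List.getElem?_set_self hkl]
  rw [h1]
  simp [PySem.List.pyGetD, PySem.List.pyGet?, List.length_set, hjx,
    List.getElem?_set_self hjl]

theorem visGet_visSet_ne (v : List (List Bool)) (y x y' x' : Int) (h : visGet v y x = false)
    (hy : 0 ≤ y) (hx : 0 ≤ x) (hy' : 0 ≤ y') (hx' : 0 ≤ x')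
    (hne : ¬(x' = x ∧ y' = y)) :
    visGet (visSet v y x) y' x' = visGet v y' x' := by
  obtain ⟨k, j, row, hky, hvk, hjx, hrj, hset⟩ := visGet_false_resolve v y x h
  have hkl : k < v.length := List.getElem?_eq_some_iff.mp hvk |>.1
  have hjl : j < row.length := List.getElem?_eq_some_iff.mp hrj |>.1
  have hkval : k = y.toNat := by
    rw [pyIdx?_nonneg _ _ hy] at hky
    split at hky
    · exact (Option.some_inj.mp hky).symm
    · exact absurd hky (by simp)
  have hjval : j = x.toNat := by
    rw [pyIdx?_nonneg _ _ hx] at hjx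
    split at hjx
    · exact (Option.some_inj.mp hjx).symm
    · exact absurd hjx (by simp)
  have hyv : y < (v.length : Int) := by
    rw [pyIdx?_nonneg _ _ hy] at hky
    by_contra hc
    rw [if_neg hc] at hky
    exact absurd hky (by simp)
  rw [hset]
  unfold visGet
  by_cases hyl : y' < (v.length : Int)
  · have hidx2 : PySem.List.pyIdx? v.length y' = some y'.toNat := by
      rw [pyIdx?_nonneg _ _ hy', if_pos hyl]
    by_cases hyy : y' = y
    · have hxx : x' ≠ x := fun hc => hne ⟨hc, hyy⟩
      subst hyy
      have hknat : y'.toNat = k := hkval.symm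
      have hL : PySem.List.pyGetD (v.set k (row.set j true)) y' [] = row.set j true := by
        simp only [PySem.List.pyGetD, PySem.List.pyGet?, List.length_set]
        rw [hidx2]
        simp only [Option.bind_some]
        rw [hknat, List.getElem?_set_self hkl]
        rfl
      have hR : PySem.List.pyGetD v y' [] = row := by
        simp only [PySem.List.pyGetD, PySem.List.pyGet?]
        rw [hidx2]
        simp only [Option.bind_some]
        rw [hknat, hvk]
        rfl
      rw [hL, hR]
      by_cases hxl : x' < (row.length : Int)
      · have hi2 : PySem.List.pyIdx? row.length x' = some x'.toNat := by
          rw [pyIdx?_nonneg _ _ hx', if_pos hxl]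
        have hjne : j ≠ x'.toNat := by
          rw [hjval]; intro hc; exact hxx (by omega)
        simp only [PySem.List.pyGetD, PySem.List.pyGet?, List.length_set]
        rw [hi2]
        simp only [Option.bind_some]
        rw [List.getElem?_set_ne hjne]
      · have hi2 : PySem.List.pyIdx? row.length x' = none := by
          rw [pyIdx?_nonneg _ _ hx', if_neg hxl]
        simp only [PySem.List.pyGetD, PySem.List.pyGet?, List.length_set]
        rw [hi2]
        simp
    · have hkne : k ≠ y'.toNat := by
        rw [hkval]; intro hc; exact hyy (by omega)
      simp only [PySem.List.pyGetD, PySem.List.pyGet?, List.length_set]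
      rw [hidx2]
      simp only [Option.bind_some]
      rw [List.getElem?_set_ne hkne]
  · have hidx2 : PySem.List.pyIdx? v.length y' = none := by
      rw [pyIdx?_nonneg _ _ hy', if_neg hyl]
    simp only [PySem.List.pyGetD, PySem.List.pyGet?, List.length_set]
    rw [hidx2]
    simp

theorem loopA_nil (board : List String) (m n : Int) (slf : Nat) (g : Int × Int)
    (v : List (List Bool)) : loopA board m n slf g v [] = none := by
  rw [loopA]

theorem loopA_cons (board : List String) (m n : Int) (slf : Nat) (g : Int × Int)
    (v : List (List Bool)) (x y c : Int) (rest : List (Int × Int × Int)) :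
    loopA board m n slf g v ((x, y, c) :: rest)
      = if (x, y) = g then some c
        else loopA board m n slf g (pushA board m n slf x y c (v, rest)).1
               (pushA board m n slf x y c (v, rest)).2 := by
  rw [loopA]

theorem stepF_eq (board : List String) (m n : Int) (slf : Nat) (p : Int × Int)
    (st : PySem.Set (Int × Int) × List (Int × Int)) (d : Int × Int) :
    stepF board m n slf p st d
      = if PySem.Set.contains st.1 (slideA board m n slf d.1 d.2 p.1 p.2) then st
        else (PySem.Set.add st.1 (slideA board m n slf d.1 d.2 p.1 p.2),
              st.2 ++ [slideA board m n slf d.1 d.2 p.1 p.2]) := rfl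

-- per-node simulation: A's direction fold over (visited matrix, queue) and the frontier fold over
-- (visited set, next frontier) mark the same cells and append the same landing list
theorem dirsFold_sim (board : List String) (m n : Int) (slf : Nat) (c : Int) (p : Int × Int)
    (hp : inG m n p) :
    ∀ (ds : List (Int × Int)) (v : List (List Bool)) (s : PySem.Set (Int × Int))
      (q : List (Int × Int × Int)) (acc : List (Int × Int)),
      RelVS m n v s →
      ∃ v' s' new,
        ds.foldl (stepA board m n slf p.1 p.2 c) (v, q) = (v', q ++ tagL new (c + 1)) ∧
        ds.foldl (stepF board m n slf p) (s, acc) = (s', acc ++ new) ∧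
        RelVS m n v' s' ∧ (∀ t ∈ new, inG m n t) ∧
        countFalse v' + new.length = countFalse v := by
  intro ds
  induction ds with
  | nil =>
    intro v s q acc hR
    exact ⟨v, s, [], by simp [tagL], by simp, hR, by simp, by simp⟩
  | cons d ds ih =>
    intro v s q acc hR
    have htG : inG m n (slideA board m n slf d.1 d.2 p.1 p.2) := by
      have := slideA_inG board m n slf d.1 d.2 p.1 p.2 (by simpa using hp)
      exact this
    set t := slideA board m n slf d.1 d.2 p.1 p.2 with ht
    have hvc : visGet v t.2 t.1 = PySem.Set.contains s t := hR t htG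
    by_cases hv : visGet v t.2 t.1 = true
    · have hsB : PySem.Set.contains s t = true := by rw [← hvc]; exact hv
      have e1 : stepA board m n slf p.1 p.2 c (v, q) d = (v, q) := by
        simp [stepA, ← ht, hv]
      have e2 : stepF board m n slf p (s, acc) d = (s, acc) := by
        rw [stepF_eq, ← ht]
        exact if_pos hsB
      rw [List.foldl_cons, List.foldl_cons, e1, e2]
      exact ih v s q acc hR
    · have hv' : visGet v t.2 t.1 = false := by simpa using hv
      have hsB : PySem.Set.contains s t = false := by rw [← hvc]; exact hv'
      have e1 : stepA board m n slf p.1 p.2 c (v, q) d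
          = (visSet v t.2 t.1, q ++ [(t.1, t.2, c + 1)]) := by
        simp [stepA, ← ht, hv']
      have e2 : stepF board m n slf p (s, acc) d
          = (PySem.Set.add s t, acc ++ [t]) := by
        rw [stepF_eq, ← ht]
        exact if_neg (by rw [hsB]; exact Bool.false_ne_true)
      have hRel' : RelVS m n (visSet v t.2 t.1) (PySem.Set.add s t) := by
        intro u hu
        rw [contains_add]
        by_cases hut : u = t
        · subst hut
          rw [visGet_visSet_self _ _ _ hv']
          simp
        · have hne : ¬(u.1 = t.1 ∧ u.2 = t.2) := by
            rintro ⟨h1, h2⟩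
            exact hut (Prod.ext h1 h2)
          rw [visGet_visSet_ne _ _ _ _ _ hv' htG.2.2.1 htG.1 hu.2.2.1 hu.1 hne]
          rw [hR u hu]
          simp [beq_eq_decide, hut]
      have hcf := countFalse_visSet v t.2 t.1 hv'
      obtain ⟨v', s', new, hA, hB, hR', hG', hcf'⟩ :=
        ih (visSet v t.2 t.1) (PySem.Set.add s t) (q ++ [(t.1, t.2, c + 1)]) (acc ++ [t]) hRel'
      refine ⟨v', s', t :: new, ?_, ?_, hR', ?_, ?_⟩
      · rw [List.foldl_cons, e1, hA]
        simp [tagL]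
      · rw [List.foldl_cons, e2, hB]
        simp
      · intro u hu
        rcases List.mem_cons.mp hu with rfl | hu
        · exact htG
        · exact hG' u hu
      · simp only [List.length_cons]
        omega

-- A's direction fold only appends (c+1)-tagged entries to the queue
theorem pushA_tags (board : List String) (m n : Int) (slf : Nat) (x y c : Int) :
    ∀ (ds : List (Int × Int)) (v : List (List Bool)) (q : List (Int × Int × Int)),
      ∃ v' cells,
        ds.foldl (stepA board m n slf x y c) (v, q) = (v', q ++ tagL cells (c + 1)) := by
  intro ds
  induction ds with
  | nil => intro v q; exact ⟨v, [], by simp [tagL]⟩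
  | cons d ds ih =>
    intro v q
    set t := slideA board m n slf d.1 d.2 x y with ht
    by_cases hv : visGet v t.2 t.1 = true
    · have e1 : stepA board m n slf x y c (v, q) d = (v, q) := by simp [stepA, ← ht, hv]
      rw [List.foldl_cons, e1]
      exact ih v q
    · have hv' : visGet v t.2 t.1 = false := by simpa using hv
      have e1 : stepA board m n slf x y c (v, q) d
          = (visSet v t.2 t.1, q ++ [(t.1, t.2, c + 1)]) := by simp [stepA, ← ht, hv']
      rw [List.foldl_cons, e1]
      obtain ⟨v', cells, h⟩ := ih (visSet v t.2 t.1) (q ++ [(t.1, t.2, c + 1)])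
      exact ⟨v', t :: cells, by rw [h]; simp [tagL]⟩

-- if the goal is among the current-level cells, A returns the current count
theorem loopA_goal_mem (board : List String) (m n : Int) (slf : Nat) (g : Int × Int) :
    ∀ (front extra : List (Int × Int)) (v : List (List Bool)) (d : Int), g ∈ front →
      loopA board m n slf g v (tagL front d ++ tagL extra (d + 1)) = some d := by
  intro front
  induction front with
  | nil => intro extra v d hg; simp at hg
  | cons p rest ih =>
    intro extra v d hg
    simp only [tagL, List.map_cons, List.cons_append]
    rw [loopA_cons]
    by_cases hpg : (p.1, p.2) = g
    · rw [if_pos hpg]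
    · rw [if_neg hpg]
      have hg' : g ∈ rest := by
        rcases List.mem_cons.mp hg with rfl | h0
        · exact absurd (by simp) hpg
        · exact h0
      obtain ⟨v', cells, hpush⟩ :=
        pushA_tags board m n slf p.1 p.2 d dirsA v
          (List.map (fun p => (p.1, p.2, d)) rest ++ List.map (fun p => (p.1, p.2, d + 1)) extra)
      have : pushA board m n slf p.1 p.2 d
          (v, List.map (fun p => (p.1, p.2, d)) rest
                ++ List.map (fun p => (p.1, p.2, d + 1)) extra)
          = (v', (List.map (fun p => (p.1, p.2, d)) rest
                ++ List.map (fun p => (p.1, p.2, d + 1)) extra) ++ tagL cells (d + 1)) := hpush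
      rw [this]
      have hq : (List.map (fun p => (p.1, p.2, d)) rest
            ++ List.map (fun p => (p.1, p.2, d + 1)) extra) ++ tagL cells (d + 1)
          = tagL rest d ++ tagL (extra ++ cells) (d + 1) := by
        simp [tagL, List.map_append]
      rw [hq]
      exact ih (extra ++ cells) v' d hg'

theorem expandF_nil (board : List String) (m n : Int) (slf : Nat)
    (st : PySem.Set (Int × Int) × List (Int × Int)) :
    expandF board m n slf st [] = st := rfl

theorem expandF_cons (board : List String) (m n : Int) (slf : Nat)
    (st : PySem.Set (Int × Int) × List (Int × Int)) (p : Int × Int)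
    (rest : List (Int × Int)) :
    expandF board m n slf st (p :: rest)
      = expandF board m n slf (dirsA.foldl (stepF board m n slf p) st) rest := rfl

-- MAIN A-SIDE SIMULATION: mid-level state equivalence of A's counted queue and the frontier BFS
theorem loopAB (board : List String) (m n : Int) (slf : Nat) (g : Int × Int) :
    ∀ (lv : Nat) (front extra : List (Int × Int)) (v : List (List Bool))
      (s : PySem.Set (Int × Int)) (d : Int),
      RelVS m n v s → (∀ p ∈ front, inG m n p) → (∀ p ∈ extra, inG m n p) →
      g ∉ front → countFalse v + extra.length < lv →
      A2I (loopA board m n slf g v (tagL front d ++ tagL extra (d + 1)))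
        = loopF board m n slf g lv (expandF board m n slf (s, extra) front).1
            (expandF board m n slf (s, extra) front).2 (d + 1) := by
  intro lv
  induction lv with
  | zero =>
    intro front extra v s d _ _ _ _ hlt
    omega
  | succ k ihk =>
    intro front
    induction front with
    | nil =>
      intro extra v s d hR _ heG _ hlt
      rw [expandF_nil]
      simp only [tagL, List.map_nil, List.nil_append]
      rw [loopF]
      cases hx : extra with
      | nil =>
        subst hx
        simp only [List.map_nil, loopA_nil, List.isEmpty_nil, if_true]
        rfl
      | cons e es =>
        subst hx
        simp only [List.isEmpty_cons, Bool.false_eq_true, if_false]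
        by_cases hg : (e :: es).contains g
        · rw [if_pos hg]
          have hin : g ∈ e :: es := List.contains_iff_mem.mp hg
          have h1 := loopA_goal_mem board m n slf g (e :: es) [] v (d + 1) hin
          simp only [tagL, List.map_nil, List.append_nil] at h1
          rw [h1]
          rfl
        · rw [if_neg hg]
          have hg' : g ∉ e :: es := fun hc => hg (List.contains_iff_mem.mpr hc)
          have hlen : 0 < (e :: es).length := by simp
          have := ihk (e :: es) [] v s (d + 1) hR heG (by simp) hg' (by
            simp only [List.length_nil]
            simp at hlt
            omega)
          simp only [tagL, List.map_nil, List.append_nil] at this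
          exact this
    | cons p rest ihf =>
      intro extra v s d hR hfG heG hgf hlt
      have hpne : p ≠ g := fun hc => hgf (hc ▸ List.mem_cons_self)
      have hgrest : g ∉ rest := fun hc => hgf (List.mem_cons_of_mem _ hc)
      have hpG : inG m n p := hfG p List.mem_cons_self
      obtain ⟨v', s', new, hA, hB, hR', hnewG, hcf⟩ :=
        dirsFold_sim board m n slf d p hpG dirsA v s
          (tagL rest d ++ tagL extra (d + 1)) extra hR
      have lhs1 : tagL (p :: rest) d ++ tagL extra (d + 1)
          = (p.1, p.2, d) :: (tagL rest d ++ tagL extra (d + 1)) := by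
        simp [tagL]
      rw [lhs1, loopA_cons, if_neg (by simpa using hpne)]
      have hPA : pushA board m n slf p.1 p.2 d (v, tagL rest d ++ tagL extra (d + 1))
          = (v', (tagL rest d ++ tagL extra (d + 1)) ++ tagL new (d + 1)) := hA
      rw [hPA]
      have hq : (tagL rest d ++ tagL extra (d + 1)) ++ tagL new (d + 1)
          = tagL rest d ++ tagL (extra ++ new) (d + 1) := by
        simp [tagL, List.map_append]
      rw [hq]
      rw [expandF_cons]
      have hBB : dirsA.foldl (stepF board m n slf p) (s, extra) = (s', extra ++ new) := hB
      rw [hBB]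
      exact ihf (extra ++ new) v' s' d hR'
        (fun q hqm => hfG q (List.mem_cons_of_mem _ hqm))
        (fun q hqm => by
          rcases List.mem_append.mp hqm with h1 | h1
          · exact heG q h1
          · exact hnewG q h1)
        hgrest
        (by simp only [List.length_append]; omega)

-- both scan results lie in the grid
theorem startGoalA_inG (board : List String) (nN mN : Nat) (h0n : 0 < nN) (h0m : 0 < mN) :
    inG (mN : Int) (nN : Int) (startGoalA board (nN : Int) (mN : Int)).1 ∧
      inG (mN : Int) (nN : Int) (startGoalA board (nN : Int) (mN : Int)).2 := by
  rw [startGoalA]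
  refine List.foldlRecOn _ _
    (motive := fun (acc : (Int × Int) × Int × Int) => inG (mN : Int) (nN : Int) acc.1 ∧ inG (mN : Int) (nN : Int) acc.2)
    ?_ ?_
  · constructor <;> (simp only [inG]; refine ⟨le_refl 0, ?_, le_refl 0, ?_⟩ <;> exact_mod_cast ‹_›)
  · intro acc hacc y hy
    have hyb : 0 ≤ y ∧ y < (nN : Int) := PySem.List.mem_pyRange_one.mp hy
    refine List.foldlRecOn _ _
      (motive := fun (acc : (Int × Int) × Int × Int) => inG (mN : Int) (nN : Int) acc.1 ∧ inG (mN : Int) (nN : Int) acc.2)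
      hacc ?_
    intro acc2 hacc2 x hx
    have hxb : 0 ≤ x ∧ x < (mN : Int) := PySem.List.mem_pyRange_one.mp hx
    have h1 : inG (mN : Int) (nN : Int)
        ((if chA board y x = 'R' then ((x, y), acc2.2) else acc2)).1 ∧
        inG (mN : Int) (nN : Int)
        ((if chA board y x = 'R' then ((x, y), acc2.2) else acc2)).2 := by
      split
      · exact ⟨⟨hxb.1, hxb.2, hyb.1, hyb.2⟩, hacc2.2⟩
      · exact hacc2
    show inG (mN : Int) (nN : Int)
        (if chA board y x = 'G'
         then ((if chA board y x = 'R' then ((x, y), acc2.2) else acc2).1, (x, y))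
         else (if chA board y x = 'R' then ((x, y), acc2.2) else acc2)).1 ∧
      inG (mN : Int) (nN : Int)
        (if chA board y x = 'G'
         then ((if chA board y x = 'R' then ((x, y), acc2.2) else acc2).1, (x, y))
         else (if chA board y x = 'R' then ((x, y), acc2.2) else acc2)).2
    split
    · exact ⟨h1.1, hxb.1, hxb.2, hyb.1, hyb.2⟩
    · exact h1

theorem visGet_v0 (nN mN : Nat) (x y : Int) (h : inG (mN : Int) (nN : Int) (x, y)) :
    visGet (List.replicate nN (List.replicate mN false)) y x = false := by
  obtain ⟨hx0, hxm, hy0, hyn⟩ := h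
  unfold visGet
  have h1 : PySem.List.pyGetD (List.replicate nN (List.replicate mN false)) y []
      = List.replicate mN false := by
    simp only [PySem.List.pyGetD, PySem.List.pyGet?, List.length_replicate]
    rw [pyIdx?_nonneg _ _ hy0, if_pos hyn]
    simp only [Option.bind_some]
    rw [List.getElem?_replicate]
    simp only [if_pos (by omega : y.toNat < nN), Option.getD_some]
  rw [h1]
  simp only [PySem.List.pyGetD, PySem.List.pyGet?, List.length_replicate]
  rw [pyIdx?_nonneg _ _ hx0, if_pos hxm]
  simp only [Option.bind_some]
  rw [List.getElem?_replicate]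
  simp [if_pos (by omega : x.toNat < mN)]

theorem cf_v0 (nN mN : Nat) :
    countFalse (List.replicate nN (List.replicate mN false)) = nN * mN := by
  simp [countFalse, List.map_replicate, List.sum_replicate, smul_eq_mul]

theorem rel_init (nN mN : Nat) (st : Int × Int) (hs : inG (mN : Int) (nN : Int) st) :
    RelVS (mN : Int) (nN : Int)
      (visSet (List.replicate nN (List.replicate mN false)) st.2 st.1)
      (PySem.Set.ofList [st]) := by
  intro q hq
  have hv0 : visGet (List.replicate nN (List.replicate mN false)) st.2 st.1 = false :=
    visGet_v0 nN mN st.1 st.2 (by simpa using hs)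
  have hofl : PySem.Set.ofList [st] = [st] := rfl
  by_cases hq0 : q = st
  · subst hq0
    rw [visGet_visSet_self _ _ _ hv0, hofl]
    simp [PySem.Set.contains]
  · have hne : ¬(q.1 = st.1 ∧ q.2 = st.2) := by
      rintro ⟨h1, h2⟩
      exact hq0 (Prod.ext h1 h2)
    rw [visGet_visSet_ne _ _ _ _ _ hv0 hs.2.2.1 hs.1 hq.2.2.1 hq.1 hne]
    rw [visGet_v0 nN mN q.1 q.2 (by simpa using hq), hofl]
    simp [PySem.Set.contains, hq0]

-- A's return value is the frontier BFS's return value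
theorem A_eq_F (r : String) (rs : List String) (hm0 : 0 < r.toList.length) :
    solution (r :: rs)
      = loopF (r :: rs) (r.toList.length : Int) ((r :: rs).length : Int)
          ((((r :: rs).length : Int) + (r.toList.length : Int)).toNat + 1)
          (startGoalA (r :: rs) ((r :: rs).length : Int) (r.toList.length : Int)).2
          ((r :: rs).length * r.toList.length + 1)
          (PySem.Set.ofList
            [(startGoalA (r :: rs) ((r :: rs).length : Int) (r.toList.length : Int)).1])
          [(startGoalA (r :: rs) ((r :: rs).length : Int) (r.toList.length : Int)).1] 0 := by
  have hnN0 : 0 < (r :: rs).length := by simp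
  have hlen : PySem.List.len (r :: rs) = ((r :: rs).length : Int) := by
    simp [PySem.List.len_eq]
  have hmI : PySem.Str.len (PySem.List.pyGetD (r :: rs) 0 "") = (r.toList.length : Int) := by
    rw [PySem.List.pyGetD_zero_cons]
    simp [PySem.Str.len]
  simp only [solution, hlen, hmI, Int.toNat_natCast]
  set sg := startGoalA (r :: rs) ((r :: rs).length : Int) (r.toList.length : Int) with hsgdef
  have hstG := startGoalA_inG (r :: rs) (r :: rs).length r.toList.length hnN0 hm0
  rw [← hsgdef] at hstG
  have hv0 : visGet (List.replicate (r :: rs).length (List.replicate r.toList.length false))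
      sg.1.2 sg.1.1 = false :=
    visGet_v0 _ _ sg.1.1 sg.1.2 (by simpa using hstG.1)
  have hrel := rel_init (r :: rs).length r.toList.length sg.1 hstG.1
  have hcf1 := countFalse_visSet _ sg.1.2 sg.1.1 hv0
  rw [cf_v0] at hcf1
  have hie : ¬(List.isEmpty [sg.1] = true) := by simp
  by_cases hg : ([sg.1] : List (Int × Int)).contains sg.2
  · rw [loopF, if_neg hie, if_pos hg]
    have hmem : sg.2 ∈ [sg.1] := List.contains_iff_mem.mp hg
    have h1 := loopA_goal_mem (r :: rs) (r.toList.length : Int) ((r :: rs).length : Int)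
        ((((r :: rs).length : Int) + (r.toList.length : Int)).toNat + 1) sg.2 [sg.1] []
        (visSet (List.replicate (r :: rs).length (List.replicate r.toList.length false))
          sg.1.2 sg.1.1) 0 hmem
    simp only [tagL, List.map_cons, List.map_nil, List.append_nil] at h1
    rw [h1]
    simp [PySem.List.min?]
  · rw [loopF, if_neg hie, if_neg hg]
    dsimp only
    have hgm : sg.2 ∉ [sg.1] := fun hc => hg (List.contains_iff_mem.mpr hc)
    have hmain := loopAB (r :: rs) (r.toList.length : Int) ((r :: rs).length : Int)
        ((((r :: rs).length : Int) + (r.toList.length : Int)).toNat + 1) sg.2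
        ((r :: rs).length * r.toList.length) [sg.1] []
        (visSet (List.replicate (r :: rs).length (List.replicate r.toList.length false))
          sg.1.2 sg.1.1)
        (PySem.Set.ofList [sg.1]) 0 hrel
        (by intro p hp; rcases List.mem_singleton.mp hp with rfl; exact hstG.1)
        (by simp) hgm
        (by
          have hpos : 0 < (r :: rs).length * r.toList.length := Nat.mul_pos hnN0 hm0
          simp only [List.length_nil]
          omega)
    simp only [tagL, List.map_cons, List.map_nil, List.append_nil] at hmain
    rw [← hmain]
    cases hA : loopA (r :: rs) (r.toList.length : Int) ((r :: rs).length : Int)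
        ((((r :: rs).length : Int) + (r.toList.length : Int)).toNat + 1) sg.2
        (visSet (List.replicate (r :: rs).length (List.replicate r.toList.length false))
          sg.1.2 sg.1.1) [(sg.1.1, sg.1.2, 0)] with
    | none => simp [A2I]
    | some c => simp [A2I, PySem.List.min?]

-- ---------- reachability levels ----------
theorem mem_reachF_succ (board : List String) (m n : Int) (slf : Nat) (start : Int × Int)
    (k : Nat) (c : Int × Int) :
    c ∈ reachF board m n slf start (k + 1)
      ↔ c ∈ reachF board m n slf start k
        ∨ ∃ p ∈ reachF board m n slf start k, c ∈ succsP board m n slf p := by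
  simp [reachF, List.mem_append, List.mem_flatMap]

theorem reachF_mono (board : List String) (m n : Int) (slf : Nat) (start : Int × Int)
    {j k : Nat} (hjk : j ≤ k) {c : Int × Int}
    (hc : c ∈ reachF board m n slf start j) : c ∈ reachF board m n slf start k := by
  induction k with
  | zero =>
    have : j = 0 := by omega
    subst this
    exact hc
  | succ k ih =>
    rcases Nat.lt_or_ge j (k + 1) with h | h
    · have := ih (by omega)
      rw [mem_reachF_succ]
      exact Or.inl this
    · have : j = k + 1 := by omega
      subst this
      exact hc

theorem succ_mem_reachF (board : List String) (m n : Int) (slf : Nat) (start : Int × Int)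
    {k : Nat} {p c : Int × Int} (hp : p ∈ reachF board m n slf start k)
    (hc : c ∈ succsP board m n slf p) : c ∈ reachF board m n slf start (k + 1) :=
  (mem_reachF_succ board m n slf start k c).mpr (Or.inr ⟨p, hp, hc⟩)

-- once a level adds nothing, the reachable set never changes again
theorem reachF_stab (board : List String) (m n : Int) (slf : Nat) (start : Int × Int)
    {i : Nat}
    (hsub : ∀ c ∈ reachF board m n slf start (i + 1), c ∈ reachF board m n slf start i) :
    ∀ (j : Nat) (c : Int × Int), c ∈ reachF board m n slf start j →
      c ∈ reachF board m n slf start i := by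
  have aux : ∀ (t : Nat) (c : Int × Int), c ∈ reachF board m n slf start (i + t) →
      c ∈ reachF board m n slf start i := by
    intro t
    induction t with
    | zero => intro c hc; exact hc
    | succ t ih =>
      intro c hc
      rw [show i + (t + 1) = (i + t) + 1 by omega, mem_reachF_succ] at hc
      rcases hc with hc | ⟨p, hp, hc⟩
      · exact ih c hc
      · exact hsub c (succ_mem_reachF board m n slf start (ih p hp) hc)
  intro j c hc
  rcases Nat.le_total j i with h | h
  · exact reachF_mono board m n slf start h hc
  · exact aux (j - i) c (by rw [show i + (j - i) = j by omega]; exact hc)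

-- find? over a range, located at the first level containing the goal
theorem find?_range_eq_some {p : Nat → Bool} {j N : Nat} (hjN : j < N) (hp : p j = true)
    (hmin : ∀ i < j, p i = false) : (List.range N).find? p = some j := by
  have hsplit : List.range N = List.range (j + 1) ++ (List.range (N - (j + 1))).map (j + 1 + ·) := by
    rw [← List.range_add]
    congr 1
    omega
  rw [hsplit, List.find?_append]
  have h1 : (List.range (j + 1)).find? p = some j := by
    rw [List.range_succ, List.find?_append]
    have h0 : (List.range j).find? p = none := by
      rw [List.find?_eq_none]
      intro x hx
      simp only [List.mem_range] at hx
      simp [hmin x hx]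
    rw [h0]
    simp [hp]
  rw [h1]
  rfl

theorem ansSpec_none (board : List String) (m n : Int) (slf : Nat) (start goal : Int × Int)
    (M : Nat) (h : ∀ j ≤ M, goal ∉ reachF board m n slf start j) :
    ansSpec board m n slf start goal M = -1 := by
  unfold ansSpec
  have : (List.range (M + 1)).find?
      (fun j => decide (goal ∈ reachF board m n slf start j)) = none := by
    rw [List.find?_eq_none]
    intro x hx
    simp only [List.mem_range] at hx
    simp [h x (by omega)]
  rw [this]

theorem ansSpec_found (board : List String) (m n : Int) (slf : Nat) (start goal : Int × Int)
    (M : Nat) {j : Nat} (hj : j ≤ M) (hgj : goal ∈ reachF board m n slf start j)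
    (hmin : ∀ i < j, goal ∉ reachF board m n slf start i) :
    ansSpec board m n slf start goal M = (j : Int) := by
  unfold ansSpec
  rw [find?_range_eq_some (p := fun j => decide (goal ∈ reachF board m n slf start j))
    (j := j) (N := M + 1) (by omega) (by simp [hgj]) (fun i hi => by simp [hmin i hi])]

-- ---------- expansion characterised by membership ----------
theorem stepF_fold_mem (board : List String) (m n : Int) (slf : Nat) (p : Int × Int) :
    ∀ (ds : List (Int × Int)) (s : PySem.Set (Int × Int)) (acc : List (Int × Int))
      (c : Int × Int),
      (PySem.Set.contains (ds.foldl (stepF board m n slf p) (s, acc)).1 c = true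
        ↔ PySem.Set.contains s c = true
          ∨ ∃ d ∈ ds, c = slideA board m n slf d.1 d.2 p.1 p.2)
      ∧ (c ∈ (ds.foldl (stepF board m n slf p) (s, acc)).2
        ↔ c ∈ acc ∨ (¬ PySem.Set.contains s c = true
            ∧ ∃ d ∈ ds, c = slideA board m n slf d.1 d.2 p.1 p.2)) := by
  intro ds
  induction ds with
  | nil =>
    intro s acc c
    simp
  | cons e ds ih =>
    intro s acc c
    set t := slideA board m n slf e.1 e.2 p.1 p.2 with ht
    by_cases hc : PySem.Set.contains s t = true
    · have e1 : stepF board m n slf p (s, acc) e = (s, acc) := by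
        rw [stepF_eq, ← ht]
        exact if_pos hc
      rw [List.foldl_cons, e1]
      obtain ⟨h1, h2⟩ := ih s acc c
      constructor
      · rw [h1]
        constructor
        · rintro (h | ⟨d, hd, rfl⟩)
          · exact Or.inl h
          · exact Or.inr ⟨d, List.mem_cons_of_mem _ hd, rfl⟩
        · rintro (h | ⟨d, hd, rfl⟩)
          · exact Or.inl h
          · rcases List.mem_cons.mp hd with rfl | hd
            · exact Or.inl hc
            · exact Or.inr ⟨d, hd, rfl⟩
      · rw [h2]
        constructor
        · rintro (h | ⟨hns, d, hd, rfl⟩)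
          · exact Or.inl h
          · exact Or.inr ⟨hns, d, List.mem_cons_of_mem _ hd, rfl⟩
        · rintro (h | ⟨hns, d, hd, rfl⟩)
          · exact Or.inl h
          · rcases List.mem_cons.mp hd with rfl | hd
            · exact absurd hc hns
            · exact Or.inr ⟨hns, d, hd, rfl⟩
    · have e1 : stepF board m n slf p (s, acc) e = (PySem.Set.add s t, acc ++ [t]) := by
        rw [stepF_eq, ← ht]
        exact if_neg hc
      rw [List.foldl_cons, e1]
      obtain ⟨h1, h2⟩ := ih (PySem.Set.add s t) (acc ++ [t]) c
      have hadd : PySem.Set.contains (PySem.Set.add s t) c = true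
          ↔ PySem.Set.contains s c = true ∨ c = t := by
        rw [contains_add]
        simp [beq_iff_eq]
      constructor
      · rw [h1, hadd]
        constructor
        · rintro ((h | rfl) | ⟨d, hd, rfl⟩)
          · exact Or.inl h
          · exact Or.inr ⟨e, List.mem_cons_self, ht⟩
          · exact Or.inr ⟨d, List.mem_cons_of_mem _ hd, rfl⟩
        · rintro (h | ⟨d, hd, rfl⟩)
          · exact Or.inl (Or.inl h)
          · rcases List.mem_cons.mp hd with rfl | hd
            · exact Or.inl (Or.inr ht.symm)
            · exact Or.inr ⟨d, hd, rfl⟩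
      · rw [h2, hadd]
        constructor
        · rintro (h | ⟨hns, d, hd, rfl⟩)
          · rcases List.mem_append.mp h with h | h
            · exact Or.inl h
            · rcases List.mem_singleton.mp h with rfl
              exact Or.inr ⟨hc, e, List.mem_cons_self, ht⟩
          · refine Or.inr ⟨fun hx => hns (Or.inl hx), d, List.mem_cons_of_mem _ hd, rfl⟩
        · rintro (h | ⟨hns, d, hd, rfl⟩)
          · exact Or.inl (List.mem_append.mpr (Or.inl h))
          · rcases List.mem_cons.mp hd with rfl | hd
            · exact Or.inl (List.mem_append.mpr (Or.inr (List.mem_singleton.mpr ht.symm)))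
            · by_cases hct : slideA board m n slf d.1 d.2 p.1 p.2 = t
              · rw [hct]
                exact Or.inl (List.mem_append.mpr (Or.inr (List.mem_singleton.mpr rfl)))
              · exact Or.inr ⟨fun hx => hx.elim hns hct, d, hd, rfl⟩

theorem expandF_mem (board : List String) (m n : Int) (slf : Nat) :
    ∀ (ps : List (Int × Int)) (s : PySem.Set (Int × Int)) (acc : List (Int × Int))
      (c : Int × Int),
      (PySem.Set.contains (expandF board m n slf (s, acc) ps).1 c = true
        ↔ PySem.Set.contains s c = true
          ∨ ∃ p ∈ ps, c ∈ succsP board m n slf p)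
      ∧ (c ∈ (expandF board m n slf (s, acc) ps).2
        ↔ c ∈ acc ∨ (¬ PySem.Set.contains s c = true
            ∧ ∃ p ∈ ps, c ∈ succsP board m n slf p)) := by
  intro ps
  induction ps with
  | nil =>
    intro s acc c
    simp [expandF_nil]
  | cons p ps ih =>
    intro s acc c
    rw [expandF_cons]
    obtain ⟨g1, g2⟩ := stepF_fold_mem board m n slf p dirsA s acc c
    rcases hst : dirsA.foldl (stepF board m n slf p) (s, acc) with ⟨s', acc'⟩
    rw [hst] at g1 g2
    obtain ⟨h1, h2⟩ := ih s' acc' c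
    have hsucc : (∃ d ∈ dirsA, c = slideA board m n slf d.1 d.2 p.1 p.2)
        ↔ c ∈ succsP board m n slf p := by
      simp [succsP, List.mem_map, eq_comm]
    constructor
    · rw [h1, g1, hsucc]
      constructor
      · rintro ((h | h) | ⟨q, hq, hcq⟩)
        · exact Or.inl h
        · exact Or.inr ⟨p, List.mem_cons_self, h⟩
        · exact Or.inr ⟨q, List.mem_cons_of_mem _ hq, hcq⟩
      · rintro (h | ⟨q, hq, hcq⟩)
        · exact Or.inl (Or.inl h)
        · rcases List.mem_cons.mp hq with rfl | hq
          · exact Or.inl (Or.inr hcq)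
          · exact Or.inr ⟨q, hq, hcq⟩
    · rw [h2, g2, g1, hsucc]
      constructor
      · rintro ((h | ⟨hns, h⟩) | ⟨hns, q, hq, hcq⟩)
        · exact Or.inl h
        · exact Or.inr ⟨hns, p, List.mem_cons_self, h⟩
        · exact Or.inr ⟨fun hx => hns (Or.inl hx), q, List.mem_cons_of_mem _ hq, hcq⟩
      · rintro (h | ⟨hns, q, hq, hcq⟩)
        · exact Or.inl (Or.inl h)
        · rcases List.mem_cons.mp hq with rfl | hq
          · exact Or.inl (Or.inr ⟨hns, hcq⟩)
          · by_cases hcp : c ∈ succsP board m n slf p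
            · exact Or.inl (Or.inr ⟨hns, hcp⟩)
            · exact Or.inr ⟨fun hx => hx.elim hns hcp, q, hq, hcq⟩

-- ---------- the frontier BFS computes ansSpec ----------
theorem loopF_inv (board : List String) (m n : Int) (slf : Nat) (start goal : Int × Int)
    (M : Nat) :
    ∀ (lv dlev : Nat) (vis : PySem.Set (Int × Int)) (frontier : List (Int × Int)),
      lv + dlev = M + 1 →
      (∀ c, PySem.Set.contains vis c = true ↔ c ∈ reachF board m n slf start dlev) →
      (∀ c, c ∈ frontier ↔ c ∈ reachF board m n slf start dlev
          ∧ ∀ i < dlev, c ∉ reachF board m n slf start i) →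
      (∀ i < dlev, goal ∉ reachF board m n slf start i) →
      loopF board m n slf goal lv vis frontier (dlev : Int)
        = ansSpec board m n slf start goal M := by
  intro lv
  induction lv with
  | zero =>
    intro dlev vis frontier hlv hv hf hg
    rw [loopF]
    exact (ansSpec_none board m n slf start goal M (fun j hj => hg j (by omega))).symm
  | succ k ih =>
    intro dlev vis frontier hlv hv hf hg
    rw [loopF]
    by_cases hemp : frontier.isEmpty = true
    · rw [if_pos hemp]
      have hfe : frontier = [] := List.isEmpty_iff.mp hemp
      subst hfe
      cases dlev with
      | zero =>
        exfalso
        have : start ∈ ([] : List (Int × Int)) := by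
          rw [hf start]
          exact ⟨by rw [reachF]; exact List.mem_singleton.mpr rfl, fun i hi => by omega⟩
        simp at this
      | succ e =>
        have hsub : ∀ c ∈ reachF board m n slf start (e + 1),
            c ∈ reachF board m n slf start e := by
          intro c hc
          by_cases hall : ∀ i < e + 1, c ∉ reachF board m n slf start i
          · exact absurd ((hf c).mpr ⟨hc, hall⟩) (by simp)
          · push_neg at hall
            obtain ⟨i, hi, hci⟩ := hall
            exact reachF_mono board m n slf start (by omega) hci
        refine (ansSpec_none board m n slf start goal M (fun j _ hgj => ?_)).symm
        exact hg e (by omega) (reachF_stab board m n slf start hsub j goal hgj)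
    · rw [if_neg hemp]
      by_cases hgf : frontier.contains goal
      · rw [if_pos hgf]
        have hgl := (hf goal).mp (List.contains_iff_mem.mp hgf)
        exact (ansSpec_found board m n slf start goal M (by omega) hgl.1 hgl.2).symm
      · rw [if_neg hgf]
        dsimp only
        have hgoal_not : goal ∉ reachF board m n slf start dlev := by
          intro hc
          by_cases hall : ∀ i < dlev, goal ∉ reachF board m n slf start i
          · exact hgf (List.contains_iff_mem.mpr ((hf goal).mpr ⟨hc, hall⟩))
          · push_neg at hall
            obtain ⟨i, hi, hci⟩ := hall
            exact hg i hi hci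
        have hg' : ∀ i < dlev + 1, goal ∉ reachF board m n slf start i := by
          intro i hi
          rcases Nat.lt_or_ge i dlev with h | h
          · exact hg i h
          · have : i = dlev := by omega
            subst this
            exact hgoal_not
        have hmemv := fun c => (expandF_mem board m n slf frontier vis [] c).1
        have hmemf := fun c => (expandF_mem board m n slf frontier vis [] c).2
        have hv' : ∀ c, PySem.Set.contains (expandF board m n slf (vis, []) frontier).1 c = true
            ↔ c ∈ reachF board m n slf start (dlev + 1) := by
          intro c
          rw [hmemv c, mem_reachF_succ]
          constructor
          · rintro (h | ⟨p, hp, hcp⟩)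
            · exact Or.inl ((hv c).mp h)
            · exact Or.inr ⟨p, ((hf p).mp hp).1, hcp⟩
          · rintro (h | ⟨p, hp, hcp⟩)
            · exact Or.inl ((hv c).mpr h)
            · by_cases hpf : ∀ i < dlev, p ∉ reachF board m n slf start i
              · exact Or.inr ⟨p, (hf p).mpr ⟨hp, hpf⟩, hcp⟩
              · push_neg at hpf
                obtain ⟨i, hi, hpi⟩ := hpf
                refine Or.inl ((hv c).mpr ?_)
                exact reachF_mono board m n slf start (by omega)
                  (succ_mem_reachF board m n slf start hpi hcp)
        have hf' : ∀ c, c ∈ (expandF board m n slf (vis, []) frontier).2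
            ↔ c ∈ reachF board m n slf start (dlev + 1)
              ∧ ∀ i < dlev + 1, c ∉ reachF board m n slf start i := by
          intro c
          rw [hmemf c]
          simp only [List.not_mem_nil, false_or]
          constructor
          · rintro ⟨hns, p, hp, hcp⟩
            have hcd : c ∉ reachF board m n slf start dlev := fun hx => hns ((hv c).mpr hx)
            refine ⟨succ_mem_reachF board m n slf start ((hf p).mp hp).1 hcp, ?_⟩
            intro i hi hci
            exact hcd (reachF_mono board m n slf start (by omega) hci)
          · rintro ⟨hc, hall⟩
            have hcd : c ∉ reachF board m n slf start dlev := hall dlev (by omega)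
            refine ⟨fun hx => hcd ((hv c).mp hx), ?_⟩
            rcases (mem_reachF_succ board m n slf start dlev c).mp hc with h | ⟨p, hp, hcp⟩
            · exact absurd h hcd
            · refine ⟨p, (hf p).mpr ⟨hp, fun i hi hpi => ?_⟩, hcp⟩
              exact hcd (reachF_mono board m n slf start (by omega)
                (succ_mem_reachF board m n slf start hpi hcp))
        have hcast : ((dlev : Int) + 1) = ((dlev + 1 : Nat) : Int) := by push_cast; ring
        rw [hcast]
        exact ih (dlev + 1) _ _ (by omega) hv' hf' hg'

theorem F_eq_ans (board : List String) (m n : Int) (slf : Nat) (start goal : Int × Int)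
    (M : Nat) :
    loopF board m n slf goal (M + 1) (PySem.Set.ofList [start]) [start] 0
      = ansSpec board m n slf start goal M := by
  have h0 : ((0 : Nat) : Int) = 0 := rfl
  rw [← h0]
  refine loopF_inv board m n slf start goal M (M + 1) 0 _ _ (by omega) ?_ ?_ ?_
  · intro c
    rw [reachF]
    constructor
    · intro h
      have : c ∈ PySem.Set.ofList [start] := by
        simpa [PySem.Set.contains] using h
      simpa [PySem.Set.mem_ofList] using this
    · intro h
      rcases List.mem_singleton.mp h with rfl
      simp [PySem.Set.contains, PySem.Set.ofList]
  · intro c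
    rw [reachF]
    constructor
    · intro h
      exact ⟨h, fun i hi => by omega⟩
    · intro h
      exact h.1
  · intro i hi
    omega

-- ---------- grid cells and the pigeonhole bound on the first level ----------
theorem mem_cellsL (nN mN : Nat) (c : Int × Int) :
    c ∈ cellsL nN mN ↔ inG (mN : Int) (nN : Int) c := by
  constructor
  · intro h
    rw [cellsL, List.mem_flatMap] at h
    obtain ⟨y, hy, hc⟩ := h
    rw [List.mem_map] at hc
    obtain ⟨x, hx, rfl⟩ := hc
    rw [List.mem_range] at hy hx
    refine ⟨?_, ?_, ?_, ?_⟩ <;> simp <;> omega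
  · rintro ⟨h1, h2, h3, h4⟩
    rw [cellsL, List.mem_flatMap]
    refine ⟨c.2.toNat, ?_, ?_⟩
    · rw [List.mem_range]; omega
    · rw [List.mem_map]
      refine ⟨c.1.toNat, ?_, ?_⟩
      · rw [List.mem_range]; omega
      · rw [Int.toNat_of_nonneg h1, Int.toNat_of_nonneg h3]

theorem length_cellsL (nN mN : Nat) : (cellsL nN mN).length = nN * mN := by
  induction nN with
  | zero => simp [cellsL]
  | succ k ih =>
    have hsplit : cellsL (k + 1) mN
        = cellsL k mN ++ (List.range mN).map (fun (x : Nat) => ((x : Int), (k : Int))) := by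
      rw [cellsL, cellsL, List.range_succ, List.flatMap_append, List.flatMap_singleton]
    rw [hsplit, List.length_append, ih]
    simp [Nat.succ_mul]

theorem reachF_inG (board : List String) (m n : Int) (slf : Nat) (start : Int × Int)
    (hs : inG m n start) : ∀ (k : Nat) (c : Int × Int),
      c ∈ reachF board m n slf start k → inG m n c := by
  intro k
  induction k with
  | zero =>
    intro c hc
    rcases List.mem_singleton.mp hc with rfl
    exact hs
  | succ k ih =>
    intro c hc
    rcases (mem_reachF_succ board m n slf start k c).mp hc with h | ⟨p, hp, hcp⟩
    · exact ih c h
    · simp only [succsP, List.mem_map] at hcp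
      obtain ⟨d, _, rfl⟩ := hcp
      exact slideA_inG board m n slf d.1 d.2 p.1 p.2 (by simpa using ih p hp)

-- goal first reached at level j  ⇒  j < n*m  (each earlier level adds a fresh grid cell)
theorem first_lt_M (board : List String) (nN mN : Nat) (slf : Nat) (start goal : Int × Int)
    (hs : inG (mN : Int) (nN : Int) start) {j : Nat}
    (hgj : goal ∈ reachF board (mN : Int) (nN : Int) slf start j)
    (hmin : ∀ i < j, goal ∉ reachF board (mN : Int) (nN : Int) slf start i) :
    j < nN * mN := by
  have hstrict : ∀ i < j, ∃ c, c ∈ reachF board (mN : Int) (nN : Int) slf start (i + 1)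
      ∧ c ∉ reachF board (mN : Int) (nN : Int) slf start i := by
    intro i hi
    by_contra hno
    push_neg at hno
    have hsub : ∀ c ∈ reachF board (mN : Int) (nN : Int) slf start (i + 1),
        c ∈ reachF board (mN : Int) (nN : Int) slf start i := hno
    exact hmin i hi (reachF_stab board (mN : Int) (nN : Int) slf start hsub j goal hgj)
  have hcard : ∀ i ≤ j,
      i + 1 ≤ ((reachF board (mN : Int) (nN : Int) slf start i).toFinset).card := by
    intro i
    induction i with
    | zero =>
      intro _
      have : start ∈ (reachF board (mN : Int) (nN : Int) slf start 0).toFinset := by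
        simp [reachF]
      have := Finset.card_pos.mpr ⟨start, this⟩
      omega
    | succ i ih =>
      intro hij
      obtain ⟨c, hc1, hc0⟩ := hstrict i (by omega)
      have hsub : (reachF board (mN : Int) (nN : Int) slf start i).toFinset
          ⊂ (reachF board (mN : Int) (nN : Int) slf start (i + 1)).toFinset := by
        constructor
        · intro x hx
          rw [List.mem_toFinset] at hx ⊢
          exact reachF_mono board (mN : Int) (nN : Int) slf start (by omega) hx
        · intro hx
          exact hc0 (List.mem_toFinset.mp (hx (List.mem_toFinset.mpr hc1)))
      have := Finset.card_lt_card hsub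
      have := ih (by omega)
      omega
  have hj := hcard j le_rfl
  have hsub2 : (reachF board (mN : Int) (nN : Int) slf start j).toFinset
      ⊆ (cellsL nN mN).toFinset := by
    intro x hx
    rw [List.mem_toFinset] at hx ⊢
    exact (mem_cellsL nN mN x).mpr
      (reachF_inG board (mN : Int) (nN : Int) slf start hs j x hx)
  have h2 := Finset.card_le_card hsub2
  have h3 := (cellsL nN mN).toFinset_card_le
  rw [length_cellsL] at h3
  omega

-- ---------- bridging B's nested range loops to the row-major cell list ----------
theorem foldl_flatMap' {α β γ : Type} (l : List α) (h : α → List β) (g : γ → β → γ) (i : γ) :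
    (l.flatMap h).foldl g i = l.foldl (fun a x => (h x).foldl g a) i := by
  induction l generalizing i with
  | nil => rfl
  | cons a l ih => simp [List.foldl_append, ih]

theorem foldl_cells {γ : Type} (nN mN : Nat) (g : γ → (Int × Int) → γ) (i : γ) :
    (PySem.List.pyRange 0 (nN : Int)).foldl (fun a y =>
        (PySem.List.pyRange 0 (mN : Int)).foldl (fun a x => g a (x, y)) a) i
      = (cellsL nN mN).foldl g i := by
  simp [cellsL, foldl_flatMap', PySem.List.pyRange_zero_nat, List.foldl_map]

theorem sweep_eq_cells (board : List String) (nN mN : Nat) (INF : Int) (slf : Nat)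
    (dm : PySem.Dict (Int × Int) Int) :
    sweepB board (mN : Int) (nN : Int) INF slf dm
      = (cellsL nN mN).foldl
          (fun st c => cellB board (mN : Int) (nN : Int) INF slf c.2 st c.1) (dm, false) := by
  rw [sweepB, ← foldl_cells]

theorem distInit_eq_cells (nN mN : Nat) (INF : Int) :
    distInit (nN : Int) (mN : Int) INF
      = (cellsL nN mN).foldl (fun d c => d.insert c INF) PySem.Dict.empty := by
  rw [distInit, ← foldl_cells]

theorem getD_foldl_insert_const (INF : Int) :
    ∀ (l : List (Int × Int)) (d : PySem.Dict (Int × Int) Int) (c : Int × Int),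
      (l.foldl (fun d c => d.insert c INF) d).getD c 0
        = if c ∈ l then INF else d.getD c 0 := by
  intro l
  induction l with
  | nil => intro d c; simp
  | cons a l ih =>
    intro d c
    rw [List.foldl_cons, ih]
    by_cases hl : c ∈ l
    · simp [hl, List.mem_cons]
    · rw [if_neg hl, PySem.Dict.getD_insert]
      by_cases ha : c = a
      · simp [ha, List.mem_cons]
      · simp [ha, hl, List.mem_cons]

theorem fD_dm0_self (nN mN : Nat) (INF : Int) (start : Int × Int) :
    fD ((distInit (nN : Int) (mN : Int) INF).insert start 0) start = 0 := by
  rw [fD, PySem.Dict.getD_insert, if_pos rfl]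

theorem fD_dm0_ne (nN mN : Nat) (INF : Int) (start c : Int × Int) (hcs : c ≠ start)
    (hin : inG (mN : Int) (nN : Int) c) :
    fD ((distInit (nN : Int) (mN : Int) INF).insert start 0) c = INF := by
  rw [fD, PySem.Dict.getD_insert, if_neg hcs, distInit_eq_cells, getD_foldl_insert_const,
    if_pos ((mem_cellsL nN mN c).mpr hin)]

-- ---------- B-side invariants: the distance table vs the reachability levels ----------
-- every finite table entry is a true reachability witness, and all entries lie in [0, n*m]
def GOODb (board : List String) (nN mN slf : Nat) (start : Int × Int)
    (dm : PySem.Dict (Int × Int) Int) : Prop :=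
  ∀ c, inG (mN : Int) (nN : Int) c →
    0 ≤ fD dm c ∧ fD dm c ≤ ((nN * mN : Nat) : Int) ∧
      (fD dm c < ((nN * mN : Nat) : Int) →
        c ∈ reachF board (mN : Int) (nN : Int) slf start (fD dm c).toNat)

-- after enough sweeps, every cell of level j has table entry ≤ j
def LOWb (board : List String) (nN mN slf : Nat) (start : Int × Int) (k : Nat)
    (dm : PySem.Dict (Int × Int) Int) : Prop :=
  ∀ j ≤ k, ∀ c ∈ reachF board (mN : Int) (nN : Int) slf start j, fD dm c ≤ (j : Int)

theorem fD_relax_le (board : List String) (m n : Int) (slf : Nat) (d x y : Int)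
    (st : PySem.Dict (Int × Int) Int × Bool) (dir : Int × Int) (c : Int × Int) :
    fD (relaxB board m n slf d x y st dir).1 c ≤ fD st.1 c := by
  rw [relaxB]
  split
  · rename_i h
    rw [fD, PySem.Dict.getD_insert]
    by_cases hc : c = slideA board m n slf dir.1 dir.2 x y
    · rw [if_pos hc]
      have : fD st.1 c = st.1.getD (slideA board m n slf dir.1 dir.2 x y) 0 := by rw [hc]; rfl
      rw [this]
      omega
    · rw [if_neg hc]
      exact le_refl _
  · exact le_refl _

theorem fD_foldl_le {β : Type}
    (step : PySem.Dict (Int × Int) Int × Bool → β → PySem.Dict (Int × Int) Int × Bool)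
    (hstep : ∀ st b c, fD (step st b).1 c ≤ fD st.1 c) :
    ∀ (l : List β) (st : PySem.Dict (Int × Int) Int × Bool) (c : Int × Int),
      fD (l.foldl step st).1 c ≤ fD st.1 c := by
  intro l
  induction l with
  | nil => intro st c; exact le_refl _
  | cons b l ih => intro st c; exact le_trans (ih (step st b) c) (hstep st b c)

theorem fD_cell_le (board : List String) (m n INF : Int) (slf : Nat) (y : Int)
    (st : PySem.Dict (Int × Int) Int × Bool) (x : Int) (c : Int × Int) :
    fD (cellB board m n INF slf y st x).1 c ≤ fD st.1 c := by
  rw [cellB]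
  split
  · exact fD_foldl_le _ (fun st b c => fD_relax_le board m n slf _ x y st b c) dirsA st c
  · exact le_refl _

theorem fD_sweep_le (board : List String) (nN mN : Nat) (INF : Int) (slf : Nat)
    (dm : PySem.Dict (Int × Int) Int) (c : Int × Int) :
    fD (sweepB board (mN : Int) (nN : Int) INF slf dm).1 c ≤ fD dm c := by
  rw [sweep_eq_cells]
  exact fD_foldl_le _
    (fun st b c => fD_cell_le board (mN : Int) (nN : Int) INF slf b.2 st b.1 c)
    (cellsL nN mN) (dm, false) c

-- the direction loop drives the entry at each slide target down to ≤ d+1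
theorem fD_relax_fold_reached (board : List String) (m n : Int) (slf : Nat) (d x y : Int) :
    ∀ (ds : List (Int × Int)) (dir : Int × Int), dir ∈ ds →
      ∀ (st : PySem.Dict (Int × Int) Int × Bool),
        fD ((ds.foldl (relaxB board m n slf d x y) st)).1
            (slideA board m n slf dir.1 dir.2 x y) ≤ d + 1 := by
  intro ds
  induction ds with
  | nil => intro dir h; simp at h
  | cons e ds ih =>
    intro dir hdir st
    rw [List.foldl_cons]
    rcases List.mem_cons.mp hdir with rfl | hdir
    · refine le_trans
        (fD_foldl_le _ (fun st b c => fD_relax_le board m n slf d x y st b c) ds _ _) ?_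
      rw [relaxB]
      split
      · rename_i h
        rw [fD, PySem.Dict.getD_insert_self]
      · rename_i h
        show fD st.1 (slideA board m n slf dir.1 dir.2 x y) ≤ d + 1
        have : ¬ d + 1 < fD st.1 (slideA board m n slf dir.1 dir.2 x y) := h
        omega
    · exact ih dir hdir _

theorem GOOD_relax_fold (board : List String) (nN mN slf : Nat) (start : Int × Int)
    (d x y : Int) (hp : inG (mN : Int) (nN : Int) (x, y)) (hd0 : 0 ≤ d)
    (hdRF : (x, y) ∈ reachF board (mN : Int) (nN : Int) slf start d.toNat) :
    ∀ (ds : List (Int × Int)), (∀ dir ∈ ds, dir ∈ dirsA) →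
      ∀ (st : PySem.Dict (Int × Int) Int × Bool), GOODb board nN mN slf start st.1 →
        GOODb board nN mN slf start
          ((ds.foldl (relaxB board (mN : Int) (nN : Int) slf d x y) st)).1 := by
  intro ds
  induction ds with
  | nil => intro _ st h; exact h
  | cons e ds ih =>
    intro hds st hG
    rw [List.foldl_cons]
    refine ih (fun dir hdir => hds dir (List.mem_cons_of_mem _ hdir)) _ ?_
    rw [relaxB]
    split
    · rename_i hlt
      set t := slideA board (mN : Int) (nN : Int) slf e.1 e.2 x y with ht
      have htsucc : t ∈ succsP board (mN : Int) (nN : Int) slf (x, y) := by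
        rw [succsP]
        exact List.mem_map.mpr ⟨e, hds e List.mem_cons_self, ht.symm⟩
      have htG : inG (mN : Int) (nN : Int) t := by
        rw [ht]
        exact slideA_inG board (mN : Int) (nN : Int) slf e.1 e.2 x y hp
      have hlt' : d + 1 < fD st.1 t := hlt
      intro c hc
      by_cases hct : c = t
      · have hft : fD (st.1.insert t (d + 1)) c = d + 1 := by
          rw [fD, hct, PySem.Dict.getD_insert_self]
        rw [hft]
        have hbound := (hG t htG).2.1
        refine ⟨by omega, le_of_lt (lt_of_lt_of_le hlt' hbound), fun _ => ?_⟩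
        have htn : (d + 1).toNat = d.toNat + 1 := by omega
        rw [htn, hct]
        exact succ_mem_reachF board (mN : Int) (nN : Int) slf start hdRF htsucc
      · have hunch : fD (st.1.insert t (d + 1)) c = fD st.1 c := by
          rw [fD, fD, PySem.Dict.getD_insert, if_neg hct]
        rw [hunch]
        exact hG c hc
    · exact hG

theorem GOOD_cell (board : List String) (nN mN slf : Nat) (start : Int × Int) (y x : Int)
    (hin : inG (mN : Int) (nN : Int) (x, y)) (st : PySem.Dict (Int × Int) Int × Bool)
    (hG : GOODb board nN mN slf start st.1) :
    GOODb board nN mN slf start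
      (cellB board (mN : Int) (nN : Int) ((nN * mN : Nat) : Int) slf y st x).1 := by
  rw [cellB]
  split
  · rename_i hd
    have h3 := hG (x, y) hin
    exact GOOD_relax_fold board nN mN slf start (st.1.getD (x, y) 0) x y hin h3.1
      (h3.2.2 hd) dirsA (fun dir hdir => hdir) st hG
  · exact hG

theorem GOOD_sweep (board : List String) (nN mN slf : Nat) (start : Int × Int)
    (dm : PySem.Dict (Int × Int) Int) (hG : GOODb board nN mN slf start dm) :
    GOODb board nN mN slf start
      (sweepB board (mN : Int) (nN : Int) ((nN * mN : Nat) : Int) slf dm).1 := by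
  rw [sweep_eq_cells]
  refine List.foldlRecOn _ _
    (motive := fun (st : PySem.Dict (Int × Int) Int × Bool) => GOODb board nN mN slf start st.1)
    hG ?_
  intro st hst c hc
  exact GOOD_cell board nN mN slf start c.2 c.1 ((mem_cellsL nN mN c).mp hc) st hst

-- ---------- the changed flag: a silent sweep is the identity ----------
theorem relax_flag_mono (board : List String) (m n : Int) (slf : Nat) (d x y : Int)
    (st : PySem.Dict (Int × Int) Int × Bool) (dir : Int × Int) (h : st.2 = true) :
    (relaxB board m n slf d x y st dir).2 = true := by
  rw [relaxB]
  split
  · rfl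
  · exact h

theorem relax_flag_id (board : List String) (m n : Int) (slf : Nat) (d x y : Int)
    (st : PySem.Dict (Int × Int) Int × Bool) (dir : Int × Int)
    (h : (relaxB board m n slf d x y st dir).2 = false) :
    relaxB board m n slf d x y st dir = st := by
  by_cases hc : d + 1 < st.1.getD (slideA board m n slf dir.1 dir.2 x y) 0
  · rw [relaxB] at h
    rw [if_pos hc] at h
    exact absurd h (by simp)
  · rw [relaxB]
    rw [if_neg hc]

theorem foldl_flag_mono {α β : Type} (step : α × Bool → β → α × Bool)
    (hm : ∀ st b, st.2 = true → (step st b).2 = true) :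
    ∀ (l : List β) (st : α × Bool), st.2 = true → (l.foldl step st).2 = true := by
  intro l
  induction l with
  | nil => intro st h; exact h
  | cons b l ih => intro st h; exact ih (step st b) (hm st b h)

theorem foldl_flag_id {α β : Type} (step : α × Bool → β → α × Bool)
    (hm : ∀ st b, st.2 = true → (step st b).2 = true)
    (hid : ∀ st b, (step st b).2 = false → step st b = st) :
    ∀ (l : List β) (st : α × Bool), (l.foldl step st).2 = false → l.foldl step st = st := by
  intro l
  induction l with
  | nil => intro st _; rfl
  | cons b l ih =>
    intro st h
    rw [List.foldl_cons] at h ⊢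
    have h2 : (step st b).2 = false := by
      by_contra hb
      have hb' : (step st b).2 = true := by
        revert hb
        cases (step st b).2 <;> simp
      rw [foldl_flag_mono step hm l _ hb'] at h
      exact absurd h (by simp)
    rw [hid st b h2] at h ⊢
    exact ih st h

theorem cell_flag_mono (board : List String) (m n INF : Int) (slf : Nat) (y : Int)
    (st : PySem.Dict (Int × Int) Int × Bool) (x : Int) (h : st.2 = true) :
    (cellB board m n INF slf y st x).2 = true := by
  rw [cellB]
  split
  · exact foldl_flag_mono _ (fun st' b h' => relax_flag_mono board m n slf _ x y st' b h')
      dirsA st h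
  · exact h

theorem cell_flag_id (board : List String) (m n INF : Int) (slf : Nat) (y : Int)
    (st : PySem.Dict (Int × Int) Int × Bool) (x : Int)
    (h : (cellB board m n INF slf y st x).2 = false) :
    cellB board m n INF slf y st x = st := by
  by_cases hd : st.1.getD (x, y) 0 < INF
  · rw [cellB] at h ⊢
    rw [if_pos hd] at h ⊢
    exact foldl_flag_id _ (fun st' b h' => relax_flag_mono board m n slf _ x y st' b h')
      (fun st' b h' => relax_flag_id board m n slf _ x y st' b h') dirsA st h
  · rw [cellB]
    rw [if_neg hd]

theorem sweep_fix (board : List String) (nN mN : Nat) (INF : Int) (slf : Nat)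
    (dm : PySem.Dict (Int × Int) Int)
    (h : (sweepB board (mN : Int) (nN : Int) INF slf dm).2 = false) :
    (sweepB board (mN : Int) (nN : Int) INF slf dm).1 = dm := by
  rw [sweep_eq_cells] at h ⊢
  rw [foldl_flag_id _
    (fun st c h' => cell_flag_mono board (mN : Int) (nN : Int) INF slf c.2 st c.1 h')
    (fun st c h' => cell_flag_id board (mN : Int) (nN : Int) INF slf c.2 st c.1 h')
    (cellsL nN mN) (dm, false) h]

-- ---------- one sweep advances the lower bound by one level ----------
-- one sweep relaxes every slide target of a cell with finite entry down to entry+1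
theorem fD_sweep_relax (board : List String) (nN mN : Nat) (INF : Int) (slf : Nat)
    (dm : PySem.Dict (Int × Int) Int) (p c : Int × Int)
    (hpin : inG (mN : Int) (nN : Int) p) (hplt : fD dm p < INF)
    (hcp : c ∈ succsP board (mN : Int) (nN : Int) slf p) :
    fD (sweepB board (mN : Int) (nN : Int) INF slf dm).1 c ≤ fD dm p + 1 := by
  rw [sweep_eq_cells]
  obtain ⟨l1, l2, hsplit⟩ := List.append_of_mem ((mem_cellsL nN mN p).mpr hpin)
  rw [hsplit, List.foldl_append, List.foldl_cons]
  set F := fun (st : PySem.Dict (Int × Int) Int × Bool) (q : Int × Int) =>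
    cellB board (mN : Int) (nN : Int) INF slf q.2 st q.1 with hF
  have hFle : ∀ (st : PySem.Dict (Int × Int) Int × Bool) (b : Int × Int) (c : Int × Int),
      fD (F st b).1 c ≤ fD st.1 c :=
    fun st b c => fD_cell_le board (mN : Int) (nN : Int) INF slf b.2 st b.1 c
  set st1 := l1.foldl F (dm, false) with hst1
  have hd' : fD st1.1 p ≤ fD dm p := fD_foldl_le F hFle l1 (dm, false) p
  have hdlt : st1.1.getD (p.1, p.2) 0 < INF := lt_of_le_of_lt hd' hplt
  have hbranch : cellB board (mN : Int) (nN : Int) INF slf p.2 st1 p.1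
      = dirsA.foldl
          (relaxB board (mN : Int) (nN : Int) slf (st1.1.getD (p.1, p.2) 0) p.1 p.2) st1 := by
    rw [cellB]
    rw [if_pos hdlt]
  rw [hbranch]
  rw [succsP] at hcp
  obtain ⟨e, he, hce⟩ := List.mem_map.mp hcp
  have hreach := fD_relax_fold_reached board (mN : Int) (nN : Int) slf
    (st1.1.getD (p.1, p.2) 0) p.1 p.2 dirsA e he st1
  rw [hce] at hreach
  have hrest := fD_foldl_le F hFle l2
    (dirsA.foldl (relaxB board (mN : Int) (nN : Int) slf (st1.1.getD (p.1, p.2) 0) p.1 p.2) st1) c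
  have hd1 : st1.1.getD (p.1, p.2) 0 ≤ fD dm p := hd'
  omega

set_option maxHeartbeats 1000000 in
theorem LOW_sweep (board : List String) (nN mN slf : Nat) (start : Int × Int)
    (hs : inG (mN : Int) (nN : Int) start) (k : Nat) (dm : PySem.Dict (Int × Int) Int)
    (hG : GOODb board nN mN slf start dm) (hL : LOWb board nN mN slf start k dm) :
    LOWb board nN mN slf start (k + 1)
      (sweepB board (mN : Int) (nN : Int) ((nN * mN : Nat) : Int) slf dm).1 := by
  intro j hj c hc
  rcases Nat.lt_or_ge j (k + 1) with hjk | hjk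
  · exact le_trans (fD_sweep_le board nN mN ((nN * mN : Nat) : Int) slf dm c)
      (hL j (by omega) c hc)
  · have hj1 : j = k + 1 := by omega
    subst hj1
    by_cases hck : c ∈ reachF board (mN : Int) (nN : Int) slf start k
    · have h1 := le_trans (fD_sweep_le board nN mN ((nN * mN : Nat) : Int) slf dm c)
        (hL k le_rfl c hck)
      have : ((k : Nat) : Int) ≤ ((k + 1 : Nat) : Int) := by push_cast; omega
      omega
    · rcases (mem_reachF_succ board (mN : Int) (nN : Int) slf start k c).mp hc
        with h | ⟨p, hp, hcp⟩
      · exact absurd h hck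
      · have hpd : fD dm p ≤ (k : Int) := hL k le_rfl p hp
        by_cases hbig : ((k : Int)) < ((nN * mN : Nat) : Int)
        · have hpin : inG (mN : Int) (nN : Int) p :=
            reachF_inG board (mN : Int) (nN : Int) slf start hs k p hp
          have hmain := fD_sweep_relax board nN mN ((nN * mN : Nat) : Int) slf dm p c hpin
            (lt_of_le_of_lt hpd hbig) hcp
          have hcast : ((k + 1 : Nat) : Int) = (k : Int) + 1 := by push_cast; ring
          rw [hcast]
          omega
        · have hcin : inG (mN : Int) (nN : Int) c :=
            reachF_inG board (mN : Int) (nN : Int) slf start hs (k + 1) c hc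
          have h1 := (hG c hcin).2.1
          have h2 := fD_sweep_le board nN mN ((nN * mN : Nat) : Int) slf dm c
          have hcast : ((k + 1 : Nat) : Int) = (k : Int) + 1 := by push_cast; ring
          rw [hcast]
          have hbig' : ((nN * mN : Nat) : Int) ≤ (k : Int) := not_lt.mp hbig
          have : (k : Int) ≤ (k : Int) + 1 := by omega
          exact le_trans h2 (le_trans h1 (le_trans hbig' this))

theorem loopBell_inv (board : List String) (nN mN slf : Nat) (start : Int × Int)
    (hs : inG (mN : Int) (nN : Int) start) :
    ∀ (k j : Nat) (dm : PySem.Dict (Int × Int) Int),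
      GOODb board nN mN slf start dm → LOWb board nN mN slf start j dm →
      GOODb board nN mN slf start
          (loopBellB board (mN : Int) (nN : Int) ((nN * mN : Nat) : Int) slf k dm)
        ∧ LOWb board nN mN slf start (j + k)
            (loopBellB board (mN : Int) (nN : Int) ((nN * mN : Nat) : Int) slf k dm) := by
  intro k
  induction k with
  | zero =>
    intro j dm hG hL
    exact ⟨hG, by simpa using hL⟩
  | succ k ih =>
    intro j dm hG hL
    rw [loopBellB]
    by_cases hfl :
        (sweepB board (mN : Int) (nN : Int) ((nN * mN : Nat) : Int) slf dm).2 = true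
    · rw [if_pos hfl]
      have hG' := GOOD_sweep board nN mN slf start dm hG
      have hL' := LOW_sweep board nN mN slf start hs j dm hG hL
      obtain ⟨a, b⟩ := ih (j + 1) _ hG' hL'
      refine ⟨a, ?_⟩
      rw [show j + (k + 1) = (j + 1) + k by omega]
      exact b
    · rw [if_neg hfl]
      have hfix : (sweepB board (mN : Int) (nN : Int) ((nN * mN : Nat) : Int) slf dm).1 = dm :=
        sweep_fix board nN mN _ slf dm (by
          revert hfl
          cases (sweepB board (mN : Int) (nN : Int) ((nN * mN : Nat) : Int) slf dm).2 <;> simp)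
      rw [hfix]
      refine ⟨hG, ?_⟩
      have haux : ∀ i, LOWb board nN mN slf start (j + i) dm := by
        intro i
        induction i with
        | zero => simpa using hL
        | succ i ihi =>
          have hstep := LOW_sweep board nN mN slf start hs (j + i) dm hG ihi
          rw [hfix] at hstep
          rw [show j + (i + 1) = (j + i) + 1 by omega]
          exact hstep
      exact haux (k + 1)

-- ---------- B's value equals the spec ----------
theorem bell_eq_ans (board : List String) (nN mN : Nat) (h0n : 0 < nN) (h0m : 0 < mN)
    (slf : Nat) (start goal : Int × Int) (hs : inG (mN : Int) (nN : Int) start)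
    (hgoal : inG (mN : Int) (nN : Int) goal) :
    (if (loopBellB board (mN : Int) (nN : Int) ((nN * mN : Nat) : Int) slf (nN * mN)
          ((distInit (nN : Int) (mN : Int) ((nN * mN : Nat) : Int)).insert start 0)).getD goal 0
          < ((nN * mN : Nat) : Int)
     then (loopBellB board (mN : Int) (nN : Int) ((nN * mN : Nat) : Int) slf (nN * mN)
          ((distInit (nN : Int) (mN : Int) ((nN * mN : Nat) : Int)).insert start 0)).getD goal 0
     else -1)
      = ansSpec board (mN : Int) (nN : Int) slf start goal (nN * mN) := by
  set dm0 := (distInit (nN : Int) (mN : Int) ((nN * mN : Nat) : Int)).insert start 0 with hdm0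
  have hG0 : GOODb board nN mN slf start dm0 := by
    intro c hcin
    by_cases hcs : c = start
    · subst hcs
      rw [hdm0, fD_dm0_self]
      refine ⟨le_refl 0, Int.natCast_nonneg _, fun _ => ?_⟩
      rw [show ((0 : Int)).toNat = 0 from rfl, reachF]
      exact List.mem_singleton.mpr rfl
    · rw [hdm0, fD_dm0_ne nN mN _ start c hcs hcin]
      exact ⟨Int.natCast_nonneg _, le_refl _, fun h => absurd h (lt_irrefl _)⟩
  have hL0 : LOWb board nN mN slf start 0 dm0 := by
    intro j hj c hc
    have hj0 : j = 0 := by omega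
    subst hj0
    rw [reachF] at hc
    rcases List.mem_singleton.mp hc with rfl
    rw [hdm0, fD_dm0_self]
    simp
  obtain ⟨hGF, hLF⟩ := loopBell_inv board nN mN slf start hs (nN * mN) 0 dm0 hG0 hL0
  set dmF := loopBellB board (mN : Int) (nN : Int) ((nN * mN : Nat) : Int) slf (nN * mN) dm0
    with hdmF
  rw [show (0 + nN * mN) = nN * mN by omega] at hLF
  show (if fD dmF goal < ((nN * mN : Nat) : Int) then fD dmF goal else -1)
      = ansSpec board (mN : Int) (nN : Int) slf start goal (nN * mN)
  have hgG := hGF goal hgoal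
  by_cases hex : ∃ j, j ≤ nN * mN ∧ goal ∈ reachF board (mN : Int) (nN : Int) slf start j
  · obtain ⟨j0, hj0, hgj0⟩ := hex
    have hP : ∃ j, goal ∈ reachF board (mN : Int) (nN : Int) slf start j := ⟨j0, hgj0⟩
    have hPm := Nat.find_spec hP
    have hmin : ∀ i < Nat.find hP, goal ∉ reachF board (mN : Int) (nN : Int) slf start i :=
      fun i hi => Nat.find_min hP hi
    have hjm_le : Nat.find hP ≤ nN * mN := le_trans (Nat.find_min' hP hgj0) hj0
    have hjm_lt : Nat.find hP < nN * mN :=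
      first_lt_M board nN mN slf start goal hs hPm hmin
    have hg_le : fD dmF goal ≤ ((Nat.find hP : Nat) : Int) :=
      hLF (Nat.find hP) hjm_le goal hPm
    have hg_lt : fD dmF goal < ((nN * mN : Nat) : Int) := by
      have h2 : ((Nat.find hP : Nat) : Int) < ((nN * mN : Nat) : Int) := by exact_mod_cast hjm_lt
      exact lt_of_le_of_lt hg_le h2
    rw [if_pos hg_lt]
    have hg0 : 0 ≤ fD dmF goal := hgG.1
    have hgR := hgG.2.2 hg_lt
    have hge : ((Nat.find hP : Nat) : Int) ≤ fD dmF goal := by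
      have : Nat.find hP ≤ (fD dmF goal).toNat := by
        by_contra hlt
        exact hmin _ (by omega) hgR
      omega
    have hgeq : fD dmF goal = ((Nat.find hP : Nat) : Int) := le_antisymm hg_le hge
    rw [hgeq, ansSpec_found board (mN : Int) (nN : Int) slf start goal (nN * mN)
      hjm_le hPm hmin]
  · push_neg at hex
    have hnone : ∀ j ≤ nN * mN, goal ∉ reachF board (mN : Int) (nN : Int) slf start j :=
      fun j hj => hex j hj
    rw [ansSpec_none board (mN : Int) (nN : Int) slf start goal (nN * mN) hnone]
    have hnot : ¬ fD dmF goal < ((nN * mN : Nat) : Int) := by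
      intro hlt
      have hgR := hgG.2.2 hlt
      exact hnone (fD dmF goal).toNat (Int.toNat_le.mpr (le_of_lt hlt)) hgR
    rw [if_neg hnot]

-- ===== VERDICT (the statement is the Claim_ definition above) =====
theorem solution_spec : Claim_equal_solution := by
  unfold Claim_equal_solution
  intro board _ hpre
  unfold Spec_solution
  obtain ⟨hne, hm0, hrows⟩ := hpre
  obtain ⟨r, rs, rfl⟩ : ∃ r rs, board = r :: rs := by
    cases board with
    | nil => exact absurd rfl hne
    | cons a l => exact ⟨a, l, rfl⟩
  simp only [List.headD_cons] at hm0 hrows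
  have hnN0 : 0 < (r :: rs).length := by simp
  have hlen : PySem.List.len (r :: rs) = ((r :: rs).length : Int) := by
    simp [PySem.List.len_eq]
  have hmI : PySem.Str.len (PySem.List.pyGetD (r :: rs) 0 "") = (r.toList.length : Int) := by
    rw [PySem.List.pyGetD_zero_cons]
    simp [PySem.Str.len]
  rw [A_eq_F r rs hm0, F_eq_ans]
  simp only [solution_alt, hlen, hmI]
  have hprod : ((r :: rs).length : Int) * (r.toList.length : Int)
      = (((r :: rs).length * r.toList.length : Nat) : Int) := by push_cast; ring
  rw [hprod, Int.toNat_natCast]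
  have hstG := startGoalA_inG (r :: rs) (r :: rs).length r.toList.length hnN0 hm0
  exact (bell_eq_ans (r :: rs) (r :: rs).length r.toList.length hnN0 hm0
    ((((r :: rs).length : Int) + (r.toList.length : Int)).toNat + 1)
    (startGoalA (r :: rs) ((r :: rs).length : Int) (r.toList.length : Int)).1
    (startGoalA (r :: rs) ((r :: rs).length : Int) (r.toList.length : Int)).2
    hstG.1 hstG.2).symm
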